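-- pv_equiv track=rewrite | github.com/xxNine1Eightxx/GLYPHNOTES_GLYPH_STRING_COMBOS | sigils/sigil_interpreter.py | TR3_denoise_small_islands
-- ===== SOURCE A (Python) =====
-- from typing import List, Dict, Tuple, Optional
-- from collections import deque, Counter
--
-- Grid = List[List[int]]
--
-- def clone(g:Grid)->Grid: return [r[:] for r in g]
--
-- def size(g:Grid)->Tuple[int,int]: return len(g), len(g[0])
--
-- def inside(h,w,y,x)->bool: return 0<=y<h and 0<=x<w
--
-- def neighbors4(y,x): return ((y-1,x),(y+1,x),(y,x-1),(y,x+1))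
--
-- def components(g:Grid)->Tuple[List[List[int]], Dict[int,Tuple[int,int,int]]]:
--     """Return label grid and stats: label -> (color, size, first_idx). 0 = background."""
--     h,w=size(g)
--     lab=[[0]*w for _ in range(h)]
--     nxt=1
--     stats={}
--     for y in range(h):
--         for x in range(w):
--             if g[y][x]==0 or lab[y][x]!=0: continue
--             col=g[y][x]
--             q=deque([(y,x)]); lab[y][x]=nxt; cnt=0
--             while q:
--                 cy,cx=q.popleft(); cnt+=1
--                 for ny,nx in neighbors4(cy,cx):
--                     if inside(h,w,ny,nx) and g[ny][nx]==col and lab[ny][nx]==0: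
--                         lab[ny][nx]=nxt; q.append((ny,nx))
--             stats[nxt]=(col,cnt,y*w+x)
--             nxt+=1
--     return lab, stats
--
-- def TR3_denoise_small_islands(g:Grid, thresh:int=2)->Grid:
--     """Remove tiny components (< = thresh) by replacing with local mode."""
--     h,w=size(g); z=clone(g)
--     lab, stats = components(g)
--     small=[lid for lid,(col,cnt,_) in stats.items() if cnt<=thresh]
--     if not small: return z
--     for y in range(h):
--         for x in range(w):
--             lid=lab[y][x]
--             if lid in small:
--                 # gather neighbor colors
--                 neigh=[]
--                 for ny,nx in neighbors4(y,x):
--                     if inside(h,w,ny,nx) and g[ny][nx]!=0: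
--                         neigh.append(g[ny][nx])
--                 z[y][x] = Counter(neigh).most_common(1)[0][0] if neigh else 0
--     return z
-- ===== SOURCE B (Python) =====
-- from collections import Counter
--
-- def TR3_denoise_small_islands(g, thresh=2):
--     """Union-find version: one pass unions each nonzero cell with same-color
--     right/down neighbors; small components found by counting cells per root."""
--     h, w = len(g), len(g[0])
--     n = h * w
--     parent = list(range(n))
--
--     def find(i):
--         while parent[i] != i:
--             i = parent[i]
--         return i
--
--     def union(a, b):
--         ra, rb = find(a), find(b)
--         if ra != rb:
--             if ra < rb:
--                 parent[rb] = ra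
--             else:
--                 parent[ra] = rb
--
--     for y in range(h):
--         for x in range(w):
--             c = g[y][x]
--             if c == 0:
--                 continue
--             if x + 1 < w and g[y][x + 1] == c:
--                 union(y * w + x, y * w + x + 1)
--             if y + 1 < h and g[y + 1][x] == c:
--                 union(y * w + x, (y + 1) * w + x)
--
--     sizes = Counter(find(y * w + x) for y in range(h) for x in range(w) if g[y][x] != 0)
--     small = {r for r, cnt in sizes.items() if cnt <= thresh}
--     if not small:
--         return [row[:] for row in g]
--
--     out = [row[:] for row in g]
--     for y in range(h):
--         for x in range(w):
--             if g[y][x] != 0 and find(y * w + x) in small: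
--                 neigh = [g[ny][nx] for ny, nx in ((y-1,x),(y+1,x),(y,x-1),(y,x+1))
--                          if 0 <= ny < h and 0 <= nx < w and g[ny][nx] != 0]
--                 out[y][x] = Counter(neigh).most_common(1)[0][0] if neigh else 0
--     return out
-- ===== Notes on version B (the rewrite author's own statement) =====
-- stated objective: alternative
-- what changed: A labels components with a per-component BFS flood fill (deque + label grid + stats dict); B replaces that with a union-find over flat cell indices: one raster pass unions each nonzero cell with its same-color right/down neighbors, component sizes are counted per find-root, and the second pass (neighbor-mode replacement read from the original grid) is kept.
import Mathlib
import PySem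

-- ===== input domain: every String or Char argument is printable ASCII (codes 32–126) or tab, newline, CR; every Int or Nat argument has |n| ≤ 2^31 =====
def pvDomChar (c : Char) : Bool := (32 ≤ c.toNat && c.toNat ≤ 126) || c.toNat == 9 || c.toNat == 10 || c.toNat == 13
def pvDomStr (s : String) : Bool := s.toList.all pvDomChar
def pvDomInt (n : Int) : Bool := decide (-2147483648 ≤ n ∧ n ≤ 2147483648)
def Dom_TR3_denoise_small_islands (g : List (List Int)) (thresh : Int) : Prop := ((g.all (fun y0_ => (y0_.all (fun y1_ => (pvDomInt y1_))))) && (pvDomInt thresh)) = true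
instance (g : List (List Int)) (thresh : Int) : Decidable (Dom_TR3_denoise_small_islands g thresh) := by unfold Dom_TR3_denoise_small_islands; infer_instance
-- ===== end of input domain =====

-- B replaces A's per-component BFS flood fill (label grid + stats dict) by a union-find over
-- cell indices (one pass of right/down unions, sizes counted per root); objective: alternative.

-- ===== PORT A =====
-- 2-D read g[y][x]; used only under an inside-check (0 ≤ y < h, 0 ≤ x < w, rows at least w
-- long — guaranteed by Pre_), where it is exact.
def pvAt (g : List (List Int)) (y x : Int) : Int := (g.getD y.toNat []).getD x.toNat 0

-- 2-D write m[y][x] = v; used only under an inside-check, where it is exact.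
def pvSet2 (m : List (List Int)) (y x v : Int) : List (List Int) :=
  m.set y.toNat ((m.getD y.toNat []).set x.toNat v)

-- inside(h,w,y,x)
def pvInside (h w y x : Int) : Bool := decide (0 ≤ y) && decide (y < h) && decide (0 ≤ x) && decide (x < w)

-- neighbors4(y,x)
def pvNeighbors4 (y x : Int) : List (Int × Int) := [(y-1, x), (y+1, x), (y, x-1), (y, x+1)]

-- Counter(neigh).most_common(1)[0][0]: heapq.nlargest(1, items, key=count) is the FIRST item
-- of maximal count in Counter insertion order = PySem.List.max? over the counter's items.
def pvMost1 (neigh : List Int) : Int :=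
  ((PySem.List.max? (PySem.Dict.counter neigh).items (fun it => it.2)).map (fun it => it.1)).getD 0

-- the BFS while-loop of components(); fuel h*w+1 (pops ≤ component size ≤ h*w, proved below)
def pvBfs (g : List (List Int)) (hh ww col nxt : Int) :
    Nat → List (Int × Int) → List (List Int) → Int → (List (List Int) × Int)
  | 0, _, lab, cnt => (lab, cnt)
  | _ + 1, [], lab, cnt => (lab, cnt)
  | fuel + 1, u :: q, lab, cnt =>
      let st := (pvNeighbors4 u.1 u.2).foldl
        (fun (st : List (List Int) × List (Int × Int)) nb =>
          if pvInside hh ww nb.1 nb.2 && (pvAt g nb.1 nb.2 == col) && (pvAt st.1 nb.1 nb.2 == 0) then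
            (pvSet2 st.1 nb.1 nb.2 nxt, st.2 ++ [nb])
          else st) (lab, q)
      pvBfs g hh ww col nxt fuel st.2 st.1 (cnt + 1)

-- components(g): label grid and stats dict (label -> (color, size, first_idx))
def pvComponents (g : List (List Int)) :
    List (List Int) × PySem.Dict Int (Int × Int × Int) :=
  let hh : Int := g.length
  let ww : Int := (g.headD []).length
  let lab0 : List (List Int) := (List.range g.length).map (fun _ => List.replicate (g.headD []).length (0 : Int))
  let st := (PySem.List.pyRange 0 hh 1).foldl (fun st y =>
    (PySem.List.pyRange 0 ww 1).foldl
      (fun (st : List (List Int) × Int × PySem.Dict Int (Int × Int × Int)) x =>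
        if (pvAt g y x == 0) || (pvAt st.1 y x != 0) then st
        else
          let col := pvAt g y x
          let r := pvBfs g hh ww col st.2.1 (g.length * (g.headD []).length + 1)
                     [(y, x)] (pvSet2 st.1 y x st.2.1) 0
          (r.1, st.2.1 + 1, st.2.2.insert st.2.1 (col, r.2, y * ww + x)))
      st) (lab0, 1, PySem.Dict.empty)
  (st.1, st.2.2)

def TR3_denoise_small_islands (g : List (List Int)) (thresh : Int) : List (List Int) :=
  let hh : Int := g.length
  let ww : Int := (g.headD []).length
  let z := g.map (fun r => r)                    -- clone
  let ls := pvComponents g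
  let small := (ls.2.items.filter (fun it => it.2.2.1 ≤ thresh)).map (fun it => it.1)
  if small.isEmpty then z
  else
    (PySem.List.pyRange 0 hh 1).foldl (fun z y =>
      (PySem.List.pyRange 0 ww 1).foldl (fun z x =>
        if small.contains (pvAt ls.1 y x) then
          let neigh := (pvNeighbors4 y x).foldl (fun ne nb =>
            if pvInside hh ww nb.1 nb.2 && (pvAt g nb.1 nb.2 != 0) then ne ++ [pvAt g nb.1 nb.2]
            else ne) []
          pvSet2 z y x (if neigh.isEmpty then 0 else pvMost1 neigh)
        else z) z) z

-- ===== PORT B =====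
-- find(i): while parent[i] != i: i = parent[i].  Fuel parent.length suffices: B links the
-- larger root under the smaller, so parent chains strictly decrease (proved below).
def pvFindF (parent : List Int) : Nat → Int → Int
  | 0, i => i
  | fuel + 1, i =>
      let p := parent.getD i.toNat 0
      if p != i then pvFindF parent fuel p else i

def pvFind (parent : List Int) (i : Int) : Int := pvFindF parent parent.length i

def pvUnion (parent : List Int) (a b : Int) : List Int :=
  let ra := pvFind parent a
  let rb := pvFind parent b
  if ra != rb then (if ra < rb then parent.set rb.toNat ra else parent.set ra.toNat rb)
  else parent

def TR3_denoise_small_islands_alt (g : List (List Int)) (thresh : Int) : List (List Int) :=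
  let hh : Int := g.length
  let ww : Int := (g.headD []).length
  let parent0 : List Int := PySem.List.pyRange 0 (hh * ww) 1   -- list(range(h*w))
  let parent := (PySem.List.pyRange 0 hh 1).foldl (fun par y =>
    (PySem.List.pyRange 0 ww 1).foldl (fun (par : List Int) x =>
      let c := pvAt g y x
      if c == 0 then par
      else
        let par := if decide (x + 1 < ww) && (pvAt g y (x + 1) == c) then
                     pvUnion par (y * ww + x) (y * ww + x + 1) else par
        if decide (y + 1 < hh) && (pvAt g (y + 1) x == c) then
          pvUnion par (y * ww + x) ((y + 1) * ww + x) else par) par) parent0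
  let roots := (PySem.List.pyRange 0 hh 1).foldl (fun acc y =>
    (PySem.List.pyRange 0 ww 1).foldl (fun (acc : List Int) x =>
      if pvAt g y x != 0 then acc ++ [pvFind parent (y * ww + x)] else acc) acc) []
  let sizes := PySem.Dict.counter roots
  let small : PySem.Set Int :=
    PySem.Set.ofList ((sizes.items.filter (fun it => it.2 ≤ thresh)).map (fun it => it.1))
  if small.isEmpty then g.map (fun r => r)
  else
    (PySem.List.pyRange 0 hh 1).foldl (fun out y =>
      (PySem.List.pyRange 0 ww 1).foldl (fun (out : List (List Int)) x =>
        if (pvAt g y x != 0) && small.contains (pvFind parent (y * ww + x)) then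
          let neigh := ((pvNeighbors4 y x).filter (fun nb =>
              (decide (0 ≤ nb.1) && decide (nb.1 < hh) && decide (0 ≤ nb.2) && decide (nb.2 < ww)) &&
              (pvAt g nb.1 nb.2 != 0))).map (fun nb => pvAt g nb.1 nb.2)
          pvSet2 out y x (if neigh.isEmpty then 0 else pvMost1 neigh)
        else out) out) (g.map (fun r => r))

-- ===== PRECONDITION & SPEC =====
-- Pre_ excludes exactly the inputs where A raises: the empty grid (len(g[0]) is an
-- IndexError) and grids with a row shorter than the first row (g[y][x] raises during the
-- scan).  Rows longer than the first row are allowed (A returns on them).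
def Pre_TR3_denoise_small_islands (g : List (List Int)) (thresh : Int) : Prop :=
  g ≠ [] ∧ ∀ r ∈ g, (g.headD []).length ≤ r.length

instance (g : List (List Int)) (thresh : Int) : Decidable (Pre_TR3_denoise_small_islands g thresh) := by
  unfold Pre_TR3_denoise_small_islands; infer_instance

def pvWitness_TR3_denoise_small_islands : List (List Int) × Int := ([[1, 0, 2], [0, 2, 2]], 1)

def Spec_TR3_denoise_small_islands (g : List (List Int)) (thresh : Int) (out : List (List Int)) : Prop :=
  out = TR3_denoise_small_islands_alt g thresh
instance (g : List (List Int)) (thresh : Int) (out : List (List Int)) : Decidable (Spec_TR3_denoise_small_islands g thresh out) := by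
  unfold Spec_TR3_denoise_small_islands; infer_instance

-- ===== CLAIM (what is proved, stated in full; the proofs are below) =====
def Claim_equal_TR3_denoise_small_islands : Prop :=
  ∀ (g : List (List Int)) (thresh : Int), Dom_TR3_denoise_small_islands g thresh →
    Pre_TR3_denoise_small_islands g thresh →
    Spec_TR3_denoise_small_islands g thresh (TR3_denoise_small_islands g thresh)

-- ===== LEMMAS AND PROOFS =====


theorem pvFindF_succ (parent : List Int) (fuel : Nat) (i : Int) :
    pvFindF parent (fuel + 1) i =
      if parent.getD i.toNat 0 = i then i else pvFindF parent fuel (parent.getD i.toNat 0) := by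
  show (if (parent.getD i.toNat 0 != i) = true then _ else _) = _
  rcases Decidable.em (parent.getD i.toNat 0 = i) with h | h
  · simp [h]
  · simp [h]

-- parent array well-formedness: entries point (weakly) downward
def ufWf (n : Nat) (parent : List Int) : Prop :=
  parent.length = n ∧ ∀ j : Nat, j < n → 0 ≤ parent.getD j 0 ∧ parent.getD j 0 ≤ (j : Int)

def ufInR (n : Nat) (i : Int) : Prop := 0 ≤ i ∧ i < (n : Int)

theorem ufFindF_stable (n : Nat) (parent : List Int) (hw : ufWf n parent) :
    ∀ i : Int, ufInR n i → ∀ f1 f2 : Nat, i.toNat < f1 → i.toNat < f2 →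
      pvFindF parent f1 i = pvFindF parent f2 i := by
  have hkey : ∀ k : Nat, ∀ i : Int, i.toNat ≤ k → ufInR n i → ∀ f1 f2 : Nat, i.toNat < f1 → i.toNat < f2 →
      pvFindF parent f1 i = pvFindF parent f2 i := by
    intro k
    induction k with
    | zero =>
      rintro i hik ⟨hi0, hi1⟩ f1 f2 h1 h2
      match f1, f2, h1, h2 with
      | fa+1, fb+1, _, _ =>
        rw [pvFindF_succ, pvFindF_succ]
        have hp := hw.2 i.toNat (by omega)
        have heq : parent.getD i.toNat 0 = i := by omega
        rw [if_pos heq, if_pos heq]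
    | succ k ih =>
      rintro i hik ⟨hi0, hi1⟩ f1 f2 h1 h2
      match f1, f2, h1, h2 with
      | fa+1, fb+1, _, _ =>
        rw [pvFindF_succ, pvFindF_succ]
        have hp := hw.2 i.toNat (by omega)
        by_cases hpi : parent.getD i.toNat 0 = i
        · rw [if_pos hpi, if_pos hpi]
        · rw [if_neg hpi, if_neg hpi]
          exact ih (parent.getD i.toNat 0) (by omega) ⟨hp.1, by omega⟩ fa fb (by omega) (by omega)
  rintro i ⟨hi0, hi1⟩ f1 f2 h1 h2
  exact hkey i.toNat i le_rfl ⟨hi0, hi1⟩ f1 f2 h1 h2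

theorem ufFindF_spec (n : Nat) (parent : List Int) (hw : ufWf n parent) :
    ∀ i : Int, ufInR n i → ∀ f : Nat, i.toNat < f →
      0 ≤ pvFindF parent f i ∧ pvFindF parent f i ≤ i ∧
        parent.getD (pvFindF parent f i).toNat 0 = pvFindF parent f i := by
  have hkey : ∀ k : Nat, ∀ i : Int, i.toNat ≤ k → ufInR n i → ∀ f : Nat, i.toNat < f →
      0 ≤ pvFindF parent f i ∧ pvFindF parent f i ≤ i ∧
        parent.getD (pvFindF parent f i).toNat 0 = pvFindF parent f i := by
    intro k
    induction k with
    | zero =>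
      rintro i hik ⟨hi0, hi1⟩ f hf
      match f, hf with
      | fa+1, _ =>
        rw [pvFindF_succ]
        have hp := hw.2 i.toNat (by omega)
        have heq : parent.getD i.toNat 0 = i := by omega
        rw [if_pos heq]
        exact ⟨hi0, le_rfl, heq⟩
    | succ k ih =>
      rintro i hik ⟨hi0, hi1⟩ f hf
      match f, hf with
      | fa+1, _ =>
        rw [pvFindF_succ]
        have hp := hw.2 i.toNat (by omega)
        by_cases hpi : parent.getD i.toNat 0 = i
        · rw [if_pos hpi]; exact ⟨hi0, le_rfl, hpi⟩
        · rw [if_neg hpi]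
          have := ih (parent.getD i.toNat 0) (by omega) ⟨hp.1, by omega⟩ fa (by omega)
          exact ⟨this.1, by omega, this.2.2⟩
  rintro i ⟨hi0, hi1⟩
  exact hkey i.toNat i le_rfl ⟨hi0, hi1⟩

theorem ufFind_spec (n : Nat) (parent : List Int) (hw : ufWf n parent) (i : Int) (hi : ufInR n i) :
    0 ≤ pvFind parent i ∧ pvFind parent i ≤ i ∧
      parent.getD (pvFind parent i).toNat 0 = pvFind parent i := by
  obtain ⟨hi0, hi1⟩ := hi
  have hlen : parent.length = n := hw.1
  exact ufFindF_spec n parent hw i ⟨hi0, hi1⟩ parent.length (by omega)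

theorem ufFind_inR (n : Nat) (parent : List Int) (hw : ufWf n parent) (i : Int) (hi : ufInR n i) :
    ufInR n (pvFind parent i) := by
  have h := ufFind_spec n parent hw i hi
  obtain ⟨hi0, hi1⟩ := hi
  exact ⟨h.1, by have := h.2.1; omega⟩

theorem ufFind_of_root (n : Nat) (parent : List Int) (hw : ufWf n parent) (i : Int)
    (hi : ufInR n i) (hr : parent.getD i.toNat 0 = i) : pvFind parent i = i := by
  obtain ⟨hi0, hi1⟩ := hi
  have hlen : parent.length = n := hw.1
  have hf : 0 < parent.length := by omega
  unfold pvFind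
  match hl : parent.length, hf with
  | fa+1, _ => rw [pvFindF_succ, if_pos hr]

theorem ufFind_parent_step (n : Nat) (parent : List Int) (hw : ufWf n parent) (i : Int)
    (hi : ufInR n i) (hne : parent.getD i.toNat 0 ≠ i) :
    pvFind parent i = pvFind parent (parent.getD i.toNat 0) := by
  obtain ⟨hi0, hi1⟩ := hi
  have hp := hw.2 i.toNat (by omega)
  have hlen : parent.length = n := hw.1
  have h1 : 0 < parent.length := by omega
  unfold pvFind
  match hl : parent.length, h1 with
  | fa+1, _ =>
    rw [pvFindF_succ, if_neg hne]
    exact ufFindF_stable n parent hw (parent.getD i.toNat 0)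
      ⟨hp.1, by omega⟩ fa (fa+1) (by omega) (by omega)

-- after linking root r2 under root r1 (r1 < r2), roots remap r2 ↦ r1
theorem ufLink_wf (n : Nat) (parent : List Int) (hw : ufWf n parent) (r1 r2 : Int)
    (h1 : ufInR n r1) (h2 : ufInR n r2) (hlt : r1 < r2) :
    ufWf n (parent.set r2.toNat r1) := by
  obtain ⟨h10, h11⟩ := h1
  obtain ⟨h20, h21⟩ := h2
  refine ⟨by simpa using hw.1, ?_⟩
  intro j hj
  have hjl : j < parent.length := by have := hw.1; omega
  by_cases hje : j = r2.toNat
  · subst hje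
    rw [List.getD_eq_getElem?_getD, List.getElem?_set_self (by omega)]
    simpa using ⟨h10, by omega⟩
  · rw [List.getD_eq_getElem?_getD, List.getElem?_set_ne (by omega)]
    rw [← List.getD_eq_getElem?_getD]
    exact hw.2 j hj

theorem ufLink_find (n : Nat) (parent : List Int) (hw : ufWf n parent) (r1 r2 : Int)
    (h1 : ufInR n r1) (h2 : ufInR n r2) (hlt : r1 < r2)
    (hr1 : parent.getD r1.toNat 0 = r1) (hr2 : parent.getD r2.toNat 0 = r2) :
    ∀ i : Int, ufInR n i →
      pvFind (parent.set r2.toNat r1) i = if pvFind parent i = r2 then r1 else pvFind parent i := by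
  obtain ⟨h10, h11⟩ := h1
  obtain ⟨h20, h21⟩ := h2
  have hw' := ufLink_wf n parent hw r1 r2 ⟨h10, h11⟩ ⟨h20, h21⟩ hlt
  set parent' := parent.set r2.toNat r1 with hp'
  have hat : ∀ j : Nat, j < n → parent'.getD j 0 = if j = r2.toNat then r1 else parent.getD j 0 := by
    intro j hj
    have hjl : j < parent.length := by have := hw.1; omega
    by_cases hje : j = r2.toNat
    · subst hje
      rw [if_pos rfl, List.getD_eq_getElem?_getD, List.getElem?_set_self (by omega)]
      simp
    · rw [if_neg hje, List.getD_eq_getElem?_getD, List.getElem?_set_ne (by omega), ← List.getD_eq_getElem?_getD]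
  have hr1' : parent'.getD r1.toNat 0 = r1 := by
    rw [hat r1.toNat (by omega), if_neg (by omega)]; exact hr1
  have hstep : ∀ i : Int, ufInR n i →
      (∀ p : Int, 0 ≤ p → p.toNat < i.toNat →
        pvFind parent' p = if pvFind parent p = r2 then r1 else pvFind parent p) →
      pvFind parent' i = if pvFind parent i = r2 then r1 else pvFind parent i := by
    rintro i ⟨hi0, hi1⟩ ih
    by_cases hir2 : i = r2
    · subst hir2
      have hat2 : parent'.getD i.toNat 0 = r1 := by
        rw [hat i.toNat (by omega), if_pos rfl]
      have hx := ufFind_parent_step n parent' hw' i ⟨hi0, hi1⟩ (by rw [hat2]; omega)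
      rw [hx, hat2, ufFind_of_root n parent' hw' r1 ⟨h10, h11⟩ hr1',
        ufFind_of_root n parent hw i ⟨hi0, hi1⟩ hr2, if_pos rfl]
    · have hne2 : i.toNat ≠ r2.toNat := by omega
      have hat2 : parent'.getD i.toNat 0 = parent.getD i.toNat 0 := by
        rw [hat i.toNat (by omega), if_neg hne2]
      by_cases hroot : parent.getD i.toNat 0 = i
      · rw [ufFind_of_root n parent' hw' i ⟨hi0, hi1⟩ (by rw [hat2]; exact hroot),
          ufFind_of_root n parent hw i ⟨hi0, hi1⟩ hroot, if_neg hir2]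
      · have hp := hw.2 i.toNat (by omega)
        have hlt2 : (parent.getD i.toNat 0).toNat < i.toNat := by omega
        rw [ufFind_parent_step n parent' hw' i ⟨hi0, hi1⟩ (by rw [hat2]; exact hroot), hat2,
          ufFind_parent_step n parent hw i ⟨hi0, hi1⟩ hroot]
        exact ih (parent.getD i.toNat 0) hp.1 hlt2
  have hkey : ∀ k : Nat, ∀ i : Int, i.toNat ≤ k → ufInR n i →
      pvFind parent' i = if pvFind parent i = r2 then r1 else pvFind parent i := by
    intro k
    induction k with
    | zero =>
      rintro i hik ⟨hi0, hi1⟩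
      exact hstep i ⟨hi0, hi1⟩ (fun p hp0 hplt => by omega)
    | succ k ih =>
      rintro i hik ⟨hi0, hi1⟩
      refine hstep i ⟨hi0, hi1⟩ (fun p hp0 hplt => ?_)
      exact ih p (by omega) ⟨hp0, by omega⟩
  rintro i ⟨hi0, hi1⟩
  exact hkey i.toNat i le_rfl ⟨hi0, hi1⟩

theorem ufUnion_wf (n : Nat) (parent : List Int) (hw : ufWf n parent) (a b : Int)
    (ha : ufInR n a) (hb : ufInR n b) : ufWf n (pvUnion parent a b) := by
  unfold pvUnion
  have hsa := ufFind_spec n parent hw a ha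
  have hsb := ufFind_spec n parent hw b hb
  have hra := ufFind_inR n parent hw a ha
  have hrb := ufFind_inR n parent hw b hb
  by_cases hne : pvFind parent a = pvFind parent b
  · simp [hne]; exact hw
  · have hne' : (pvFind parent a != pvFind parent b) = true := by simpa using hne
    rw [if_pos hne']
    by_cases hlt : pvFind parent a < pvFind parent b
    · rw [if_pos hlt]; exact ufLink_wf n parent hw _ _ hra hrb hlt
    · rw [if_neg hlt]
      exact ufLink_wf n parent hw _ _ hrb hra (by omega)

theorem ufUnion_find (n : Nat) (parent : List Int) (hw : ufWf n parent) (a b : Int)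
    (ha : ufInR n a) (hb : ufInR n b) :
    ∀ i j : Int, ufInR n i → ufInR n j →
      (pvFind (pvUnion parent a b) i = pvFind (pvUnion parent a b) j ↔
        (pvFind parent i = pvFind parent j ∨
          ((pvFind parent i = pvFind parent a ∨ pvFind parent i = pvFind parent b) ∧
           (pvFind parent j = pvFind parent a ∨ pvFind parent j = pvFind parent b)))) := by
  intro i j hi hj
  unfold pvUnion
  have hsa := ufFind_spec n parent hw a ha
  have hsb := ufFind_spec n parent hw b hb
  have hra := ufFind_inR n parent hw a ha
  have hrb := ufFind_inR n parent hw b hb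
  by_cases hne : pvFind parent a = pvFind parent b
  · simp only [hne, bne_self_eq_false, Bool.false_eq_true, if_false]
    constructor
    · intro h; exact Or.inl h
    · rintro (h | ⟨h1, h2⟩)
      · exact h
      · rcases h1 with h1 | h1 <;> rcases h2 with h2 | h2 <;> rw [h1, h2, ← hne] <;> rfl
  · have hne' : (pvFind parent a != pvFind parent b) = true := by simpa using hne
    rw [if_pos hne']
    by_cases hlt : pvFind parent a < pvFind parent b
    · rw [if_pos hlt]
      rw [ufLink_find n parent hw _ _ hra hrb hlt hsa.2.2 hsb.2.2 i hi,
          ufLink_find n parent hw _ _ hra hrb hlt hsa.2.2 hsb.2.2 j hj]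
      by_cases hib : pvFind parent i = pvFind parent b <;>
        by_cases hjb : pvFind parent j = pvFind parent b <;>
        simp [hib, hjb] <;> omega
    · rw [if_neg hlt]
      have hlt2 : pvFind parent b < pvFind parent a := by omega
      rw [ufLink_find n parent hw _ _ hrb hra hlt2 hsb.2.2 hsa.2.2 i hi,
          ufLink_find n parent hw _ _ hrb hra hlt2 hsb.2.2 hsa.2.2 j hj]
      by_cases hib : pvFind parent i = pvFind parent a <;>
        by_cases hjb : pvFind parent j = pvFind parent a <;>
        simp [hib, hjb] <;> omega

def ufConn (L : List (Int × Int)) (i j : Int) : Prop :=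
  Relation.ReflTransGen (fun u v => (u, v) ∈ L ∨ (v, u) ∈ L) i j

theorem ufConn_nil (i j : Int) : ufConn [] i j ↔ i = j := by
  constructor
  · intro h
    induction h with
    | refl => rfl
    | tail h1 hstep ih => simp at hstep
  · rintro rfl; exact Relation.ReflTransGen.refl

theorem ufConn_symm (L : List (Int × Int)) {i j : Int} (h : ufConn L i j) : ufConn L j i := by
  refine Relation.ReflTransGen.symmetric ?_ h
  intro u v huv
  exact huv.symm

theorem ufConn_append_iff (L : List (Int × Int)) (a b i j : Int) :
    ufConn (L ++ [(a, b)]) i j ↔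
      ufConn L i j ∨
        ((ufConn L i a ∨ ufConn L i b) ∧ (ufConn L a j ∨ ufConn L b j)) := by
  have hmono : ∀ {u v : Int}, ufConn L u v → ufConn (L ++ [(a, b)]) u v := by
    intro u v h
    exact Relation.ReflTransGen.mono (fun x y hxy => by
      rcases hxy with h' | h' <;> [exact Or.inl (by simp [h']); exact Or.inr (by simp [h'])]) h
  constructor
  · intro h
    induction h with
    | refl => exact Or.inl Relation.ReflTransGen.refl
    | tail h1 hstep ih =>
      rename_i mid last
      have hstep' : ((mid, last) ∈ L ∨ (last, mid) ∈ L) ∨ (mid = a ∧ last = b) ∨ (mid = b ∧ last = a) := by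
        rcases hstep with h' | h' <;> simp only [List.mem_append, List.mem_singleton] at h'
        · rcases h' with h' | h'
          · exact Or.inl (Or.inl h')
          · have := Prod.mk.injEq .. ▸ h'
            exact Or.inr (Or.inl ⟨by simpa using congrArg Prod.fst h', by simpa using congrArg Prod.snd h'⟩)
        · rcases h' with h' | h'
          · exact Or.inl (Or.inr h')
          · exact Or.inr (Or.inr ⟨by simpa using congrArg Prod.snd h', by simpa using congrArg Prod.fst h'⟩)
      rcases hstep' with hold | ⟨rfl, rfl⟩ | ⟨rfl, rfl⟩
      · rcases ih with ih | ⟨ih1, ih2⟩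
        · exact Or.inl (ih.tail hold)
        · refine Or.inr ⟨ih1, ?_⟩
          rcases ih2 with ih2 | ih2
          · exact Or.inl (ih2.tail hold)
          · exact Or.inr (ih2.tail hold)
      · rcases ih with ih | ⟨ih1, ih2⟩
        · exact Or.inr ⟨Or.inl ih, Or.inr Relation.ReflTransGen.refl⟩
        · exact Or.inr ⟨ih1, Or.inr Relation.ReflTransGen.refl⟩
      · rcases ih with ih | ⟨ih1, ih2⟩
        · exact Or.inr ⟨Or.inr ih, Or.inl Relation.ReflTransGen.refl⟩
        · exact Or.inr ⟨ih1, Or.inl Relation.ReflTransGen.refl⟩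
  · rintro (h | ⟨h1, h2⟩)
    · exact hmono h
    · have hab : ufConn (L ++ [(a, b)]) a b := Relation.ReflTransGen.single (Or.inl (by simp))
      have hba : ufConn (L ++ [(a, b)]) b a := Relation.ReflTransGen.single (Or.inr (by simp))
      rcases h1 with h1 | h1 <;> rcases h2 with h2 | h2
      · exact (hmono h1).trans (hmono h2)
      · exact ((hmono h1).trans hab).trans (hmono h2)
      · exact ((hmono h1).trans hba).trans (hmono h2)
      · exact (hmono h1).trans (hmono h2)

def ufParent0 (n : Nat) : List Int := PySem.List.pyRange 0 (n : Int) 1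

theorem ufParent0_get (n : Nat) (j : Nat) (hj : j < n) : (ufParent0 n)[j]? = some ((j : Int)) := by
  rw [ufParent0, List.getElem?_eq_getElem (by rw [PySem.List.length_pyRange_one]; omega),
    PySem.List.getElem_pyRange_one]
  simp

theorem ufParent0_wf (n : Nat) : ufWf n (ufParent0 n) := by
  refine ⟨by simp [ufParent0], ?_⟩
  intro j hj
  rw [List.getD_eq_getElem?_getD, ufParent0_get n j hj]
  simp

theorem ufParent0_root (n : Nat) (j : Nat) (hj : j < n) :
    (ufParent0 n).getD j 0 = (j : Int) := by
  rw [List.getD_eq_getElem?_getD, ufParent0_get n j hj]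
  rfl

theorem ufFold_spec (n : Nat) (L : List (Int × Int))
    (hL : ∀ e ∈ L, ufInR n e.1 ∧ ufInR n e.2) :
    ufWf n (L.foldl (fun par e => pvUnion par e.1 e.2) (ufParent0 n)) ∧
      ∀ i j : Int, ufInR n i → ufInR n j →
        (pvFind (L.foldl (fun par e => pvUnion par e.1 e.2) (ufParent0 n)) i =
         pvFind (L.foldl (fun par e => pvUnion par e.1 e.2) (ufParent0 n)) j ↔ ufConn L i j) := by
  induction L using List.reverseRecOn with
  | nil =>
    refine ⟨ufParent0_wf n, ?_⟩
    rintro i j ⟨hi0, hi1⟩ ⟨hj0, hj1⟩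
    simp only [List.foldl_nil]
    rw [ufConn_nil]
    rw [ufFind_of_root n _ (ufParent0_wf n) i ⟨hi0, hi1⟩ (by rw [ufParent0_root n i.toNat (by omega)]; omega),
        ufFind_of_root n _ (ufParent0_wf n) j ⟨hj0, hj1⟩ (by rw [ufParent0_root n j.toNat (by omega)]; omega)]
  | append_singleton L e ih =>
    have hL' : ∀ e' ∈ L, ufInR n e'.1 ∧ ufInR n e'.2 := fun e' he' => hL e' (by simp [he'])
    have he : ufInR n e.1 ∧ ufInR n e.2 := hL e (by simp)
    obtain ⟨ihw, ihf⟩ := ih hL'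
    rw [List.foldl_append]
    simp only [List.foldl_cons, List.foldl_nil]
    set pF := L.foldl (fun par e => pvUnion par e.1 e.2) (ufParent0 n) with hpF
    refine ⟨ufUnion_wf n pF ihw e.1 e.2 he.1 he.2, ?_⟩
    intro i j hi hj
    rw [ufUnion_find n pF ihw e.1 e.2 he.1 he.2 i j hi hj]
    rw [ihf i j hi hj, ihf i e.1 hi he.1, ihf i e.2 hi he.2,
        ihf j e.1 hj he.1, ihf j e.2 hj he.2]
    rw [ufConn_append_iff]
    constructor
    · rintro (h | ⟨h1, h2⟩)
      · exact Or.inl h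
      · exact Or.inr ⟨h1, by rcases h2 with h2 | h2; exacts [Or.inl (ufConn_symm L h2), Or.inr (ufConn_symm L h2)]⟩
    · rintro (h | ⟨h1, h2⟩)
      · exact Or.inl h
      · exact Or.inr ⟨h1, by rcases h2 with h2 | h2; exacts [Or.inl (ufConn_symm L h2), Or.inr (ufConn_symm L h2)]⟩

-- ===== grid semantics =====
def gvH (g : List (List Int)) : Int := g.length
def gvW (g : List (List Int)) : Int := (g.headD []).length

def gvValid (g : List (List Int)) (p : Int × Int) : Prop :=
  0 ≤ p.1 ∧ p.1 < gvH g ∧ 0 ≤ p.2 ∧ p.2 < gvW g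

def gvVal (g : List (List Int)) (p : Int × Int) : Int := pvAt g p.1 p.2

def gvE (g : List (List Int)) (p q : Int × Int) : Prop :=
  gvValid g p ∧ gvValid g q ∧ gvVal g p ≠ 0 ∧ gvVal g q = gvVal g p ∧ q ∈ pvNeighbors4 p.1 p.2

def gvReach (g : List (List Int)) (p q : Int × Int) : Prop := Relation.ReflTransGen (gvE g) p q

def gvComp (g : List (List Int)) (p : Int × Int) : Set (Int × Int) := {q | gvReach g p q}

noncomputable def gvSize (g : List (List Int)) (p : Int × Int) : Nat := (gvComp g p).ncard

theorem mem_neighbors4_symm (p q : Int × Int) :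
    q ∈ pvNeighbors4 p.1 p.2 → p ∈ pvNeighbors4 q.1 q.2 := by
  intro h
  simp only [pvNeighbors4, List.mem_cons, List.mem_singleton, List.not_mem_nil, or_false] at h ⊢
  rcases h with h | h | h | h <;> subst h <;> simp <;> omega

theorem gvE_symm (g : List (List Int)) : Symmetric (gvE g) := by
  rintro p q ⟨hvp, hvq, hnz, hval, hadj⟩
  exact ⟨hvq, hvp, by omega, by omega, mem_neighbors4_symm p q hadj⟩

theorem gvReach_symm (g : List (List Int)) {p q : Int × Int} (h : gvReach g p q) : gvReach g q p :=
  Relation.ReflTransGen.symmetric (gvE_symm g) h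

theorem gvReach_trans (g : List (List Int)) {p q r : Int × Int}
    (h1 : gvReach g p q) (h2 : gvReach g q r) : gvReach g p r :=
  Relation.ReflTransGen.trans h1 h2

theorem gvReach_val (g : List (List Int)) {p q : Int × Int} (h : gvReach g p q) :
    gvVal g q = gvVal g p := by
  induction h with
  | refl => rfl
  | tail h1 hstep ih => rw [hstep.2.2.2.1, ih]

theorem gvReach_valid (g : List (List Int)) {p q : Int × Int} (h : gvReach g p q) :
    p = q ∨ gvValid g q := by
  induction h with
  | refl => exact Or.inl rfl
  | tail h1 hstep ih => exact Or.inr hstep.2.1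

theorem gvComp_eq_of_reach (g : List (List Int)) {p q : Int × Int} (h : gvReach g p q) :
    gvComp g p = gvComp g q := by
  ext r
  exact ⟨fun hr => gvReach_trans g (gvReach_symm g h) hr, fun hr => gvReach_trans g h hr⟩

noncomputable def gvCellFinset (g : List (List Int)) : Finset (Int × Int) :=
  Finset.Icc 0 (gvH g - 1) ×ˢ Finset.Icc 0 (gvW g - 1)

theorem mem_gvCellFinset (g : List (List Int)) (p : Int × Int) :
    p ∈ gvCellFinset g ↔ gvValid g p := by
  rcases p with ⟨y, x⟩
  simp only [gvCellFinset, Finset.mem_product, Finset.mem_Icc, gvValid]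
  omega

theorem gvComp_subset (g : List (List Int)) (p : Int × Int) :
    gvComp g p ⊆ insert p (↑(gvCellFinset g) : Set (Int × Int)) := by
  intro q hq
  rcases gvReach_valid g hq with h | h
  · exact Or.inl h.symm
  · exact Or.inr (by rw [Finset.mem_coe, mem_gvCellFinset]; exact h)

theorem gvComp_finite (g : List (List Int)) (p : Int × Int) : (gvComp g p).Finite :=
  Set.Finite.subset (Set.Finite.insert p (Finset.finite_toSet _)) (gvComp_subset g p)

theorem gvComp_subset_of_valid (g : List (List Int)) (p : Int × Int) (hv : gvValid g p) :
    gvComp g p ⊆ (↑(gvCellFinset g) : Set (Int × Int)) := by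
  intro q hq
  rcases gvReach_valid g hq with h | h
  · rw [Finset.mem_coe, mem_gvCellFinset]; exact h ▸ hv
  · rw [Finset.mem_coe, mem_gvCellFinset]; exact h

theorem gvSize_le (g : List (List Int)) (p : Int × Int) (hv : gvValid g p) :
    gvSize g p ≤ (gvCellFinset g).card := by
  rw [gvSize, ← Set.ncard_coe_finset]
  exact Set.ncard_le_ncard (gvComp_subset_of_valid g p hv) (Finset.finite_toSet _)

theorem gvCellFinset_card (g : List (List Int)) :
    (gvCellFinset g).card = g.length * (g.headD []).length := by
  rw [gvCellFinset, Finset.card_product]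
  rw [Int.card_Icc, Int.card_Icc]
  simp [gvH, gvW]

-- the raster-order cell list
def gvRaster (g : List (List Int)) : List (Int × Int) :=
  (PySem.List.pyRange 0 (gvH g) 1).flatMap (fun y => (PySem.List.pyRange 0 (gvW g) 1).map (fun x => (y, x)))

theorem gvRaster_eq_product (g : List (List Int)) :
    gvRaster g = PySem.List.pyRange 0 (gvH g) 1 ×ˢ PySem.List.pyRange 0 (gvW g) 1 := rfl

theorem mem_gvRaster (g : List (List Int)) (p : Int × Int) :
    p ∈ gvRaster g ↔ gvValid g p := by
  rcases p with ⟨y, x⟩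
  rw [gvRaster_eq_product, List.mem_product, PySem.List.mem_pyRange_one, PySem.List.mem_pyRange_one]
  unfold gvValid; constructor <;> intro h <;> simp_all
  
theorem gvRaster_nodup (g : List (List Int)) : (gvRaster g).Nodup := by
  rw [gvRaster_eq_product]
  exact List.Nodup.product (PySem.List.nodup_pyRange_one 0 (gvH g)) (PySem.List.nodup_pyRange_one 0 (gvW g))

theorem foldl_flatMap_eq {α β σ : Type} (l : List α) (f : α → List β) (F : σ → β → σ) (init : σ) :
    (l.flatMap f).foldl F init = l.foldl (fun s a => (f a).foldl F s) init := by
  induction l generalizing init with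
  | nil => rfl
  | cons x xs ih => simp [List.foldl_append, ih]

-- the nested y/x loop is the raster fold
theorem foldl_nested_eq {σ : Type} (g : List (List Int)) (F : σ → Int → Int → σ) (init : σ) :
    (PySem.List.pyRange 0 (gvH g) 1).foldl (fun s y =>
      (PySem.List.pyRange 0 (gvW g) 1).foldl (fun s x => F s y x) s) init =
    (gvRaster g).foldl (fun s c => F s c.1 c.2) init := by
  rw [gvRaster, foldl_flatMap_eq]
  refine PySem.List.foldl_congr_mem _ _ _ _ (fun acc y hy => ?_)
  rw [List.foldl_map]

-- ===== flat index encoding and the union edges of port B =====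
def gvEnc (g : List (List Int)) (p : Int × Int) : Int := p.1 * gvW g + p.2

def gvN (g : List (List Int)) : Nat := g.length * (g.headD []).length

theorem gvN_cast (g : List (List Int)) : ((gvN g : Nat) : Int) = gvH g * gvW g := by
  simp [gvN, gvH, gvW]

theorem gvEnc_inR (g : List (List Int)) (p : Int × Int) (hv : gvValid g p) :
    ufInR (gvN g) (gvEnc g p) := by
  obtain ⟨h1, h2, h3, h4⟩ := hv
  constructor
  · have : 0 ≤ p.1 * gvW g := mul_nonneg h1 (by omega)
    unfold gvEnc; omega
  · rw [gvN_cast]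
    have h5 : p.1 * gvW g + gvW g ≤ gvH g * gvW g := by
      have := mul_le_mul_of_nonneg_right (by omega : p.1 + 1 ≤ gvH g) (by omega : (0:Int) ≤ gvW g)
      nlinarith
    unfold gvEnc; omega

theorem gvEnc_inj (g : List (List Int)) (p q : Int × Int) (hp : gvValid g p) (hq : gvValid g q)
    (h : gvEnc g p = gvEnc g q) : p = q := by
  obtain ⟨hp1, hp2, hp3, hp4⟩ := hp
  obtain ⟨hq1, hq2, hq3, hq4⟩ := hq
  unfold gvEnc at h
  have h1 : p.1 = q.1 := by
    rcases lt_trichotomy p.1 q.1 with hlt | heq | hlt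
    · have := mul_le_mul_of_nonneg_right (by omega : p.1 + 1 ≤ q.1) (by omega : (0:Int) ≤ gvW g)
      nlinarith
    · exact heq
    · have := mul_le_mul_of_nonneg_right (by omega : q.1 + 1 ≤ p.1) (by omega : (0:Int) ≤ gvW g)
      nlinarith
  have h2 : p.2 = q.2 := by rw [h1] at h; omega
  exact Prod.ext h1 h2

-- the (at most two) union calls B makes at a cell, as index pairs
def gvEdgesOf (g : List (List Int)) (c : Int × Int) : List (Int × Int) :=
  (if gvVal g c ≠ 0 ∧ c.2 + 1 < gvW g ∧ gvVal g (c.1, c.2 + 1) = gvVal g c then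
     [(gvEnc g c, gvEnc g c + 1)] else []) ++
  (if gvVal g c ≠ 0 ∧ c.1 + 1 < gvH g ∧ gvVal g (c.1 + 1, c.2) = gvVal g c then
     [(gvEnc g c, gvEnc g c + gvW g)] else [])

def gvEdges (g : List (List Int)) : List (Int × Int) := (gvRaster g).flatMap (gvEdgesOf g)

theorem gvEdges_inR (g : List (List Int)) :
    ∀ e ∈ gvEdges g, ufInR (gvN g) e.1 ∧ ufInR (gvN g) e.2 := by
  intro e he
  rw [gvEdges, List.mem_flatMap] at he
  obtain ⟨c, hc, hec⟩ := he
  rw [mem_gvRaster] at hc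
  rw [gvEdgesOf, List.mem_append] at hec
  rcases hec with h | h <;> [skip; skip]
  · split_ifs at h with hcond
    · simp only [List.mem_singleton] at h
      subst h
      have hv2 : gvValid g (c.1, c.2 + 1) := by
        obtain ⟨a,b,cc,d⟩ := hc; exact ⟨by simpa using a, by simpa using b, by simp; omega, by simp; omega⟩
      constructor
      · exact gvEnc_inR g c hc
      · have := gvEnc_inR g (c.1, c.2 + 1) hv2
        have he : gvEnc g (c.1, c.2 + 1) = gvEnc g c + 1 := by unfold gvEnc; ring
        rw [he] at this; exact this
    · simp at h
  · split_ifs at h with hcond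
    · simp only [List.mem_singleton] at h
      subst h
      have hv2 : gvValid g (c.1 + 1, c.2) := by
        obtain ⟨a,b,cc,d⟩ := hc; exact ⟨by simp; omega, by simp; omega, by simpa using cc, by simpa using d⟩
      constructor
      · exact gvEnc_inR g c hc
      · have := gvEnc_inR g (c.1 + 1, c.2) hv2
        have he : gvEnc g (c.1 + 1, c.2) = gvEnc g c + gvW g := by unfold gvEnc; ring_nf
        rw [he] at this; exact this
    · simp at h

theorem gvEdge_sound (g : List (List Int)) (e : Int × Int) (he : e ∈ gvEdges g) :
    ∃ p q : Int × Int, gvE g p q ∧ e.1 = gvEnc g p ∧ e.2 = gvEnc g q := by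
  rw [gvEdges, List.mem_flatMap] at he
  obtain ⟨c, hc, hec⟩ := he
  rw [mem_gvRaster] at hc
  rw [gvEdgesOf, List.mem_append] at hec
  rcases hec with h | h
  · split_ifs at h with hcond
    · simp only [List.mem_singleton] at h
      subst h
      obtain ⟨hnz, hlt, hval⟩ := hcond
      refine ⟨c, (c.1, c.2 + 1), ⟨hc, ?_, hnz, hval, ?_⟩, rfl, ?_⟩
      · obtain ⟨a,b,cc,d⟩ := hc; exact ⟨by simpa using a, by simpa using b, by simp; omega, by simpa using hlt⟩
      · simp [pvNeighbors4]
      · unfold gvEnc; ring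
    · simp at h
  · split_ifs at h with hcond
    · simp only [List.mem_singleton] at h
      subst h
      obtain ⟨hnz, hlt, hval⟩ := hcond
      refine ⟨c, (c.1 + 1, c.2), ⟨hc, ?_, hnz, hval, ?_⟩, rfl, ?_⟩
      · obtain ⟨a,b,cc,d⟩ := hc; exact ⟨by simp; omega, by simpa using hlt, by simpa using cc, by simpa using d⟩
      · simp [pvNeighbors4]
      · unfold gvEnc; ring_nf
    · simp at h

theorem gvEdge_complete (g : List (List Int)) (p q : Int × Int) (h : gvE g p q) :
    (gvEnc g p, gvEnc g q) ∈ gvEdges g ∨ (gvEnc g q, gvEnc g p) ∈ gvEdges g := by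
  obtain ⟨hvp, hvq, hnz, hval, hadj⟩ := h
  simp only [pvNeighbors4, List.mem_cons, List.mem_singleton, List.not_mem_nil, or_false] at hadj
  rcases hadj with hq | hq | hq | hq
  · -- q = (p.1 - 1, p.2): p is the down neighbor of q; edge from q
    right
    rw [gvEdges, List.mem_flatMap]
    refine ⟨q, by rw [mem_gvRaster]; exact hvq, ?_⟩
    rw [gvEdgesOf, List.mem_append]
    right
    have hcond : gvVal g q ≠ 0 ∧ q.1 + 1 < gvH g ∧ gvVal g (q.1 + 1, q.2) = gvVal g q := by
      subst hq
      refine ⟨by simp; omega, by simpa using hvp.2.1, ?_⟩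
      simp only
      have : (p.1 - 1 + 1, p.2) = p := by simp
      rw [this]; omega
    rw [if_pos hcond]
    subst hq
    simp only [List.mem_singleton, Prod.mk.injEq]
    all_goals first | trivial | (constructor <;> first | trivial | (unfold gvEnc; ring)) | (unfold gvEnc; ring)
  · -- q = (p.1 + 1, p.2): down edge from p
    left
    rw [gvEdges, List.mem_flatMap]
    refine ⟨p, by rw [mem_gvRaster]; exact hvp, ?_⟩
    rw [gvEdgesOf, List.mem_append]
    right
    have hcond : gvVal g p ≠ 0 ∧ p.1 + 1 < gvH g ∧ gvVal g (p.1 + 1, p.2) = gvVal g p := by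
      refine ⟨hnz, by have := hvq.2.1; rw [hq] at this; simpa using this, ?_⟩
      rw [← hq]; exact hval
    rw [if_pos hcond]
    subst hq
    simp only [List.mem_singleton, Prod.mk.injEq]
    all_goals first | trivial | (constructor <;> first | trivial | (unfold gvEnc; ring)) | (unfold gvEnc; ring)
  · -- q = (p.1, p.2 - 1): p is the right neighbor of q; edge from q
    right
    rw [gvEdges, List.mem_flatMap]
    refine ⟨q, by rw [mem_gvRaster]; exact hvq, ?_⟩
    rw [gvEdgesOf, List.mem_append]
    left
    have hcond : gvVal g q ≠ 0 ∧ q.2 + 1 < gvW g ∧ gvVal g (q.1, q.2 + 1) = gvVal g q := by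
      subst hq
      refine ⟨by simp; omega, by simpa using hvp.2.2.2, ?_⟩
      simp only
      have : (p.1, p.2 - 1 + 1) = p := by simp
      rw [this]; omega
    rw [if_pos hcond]
    subst hq
    simp only [List.mem_singleton, Prod.mk.injEq]
    all_goals first | trivial | (constructor <;> first | trivial | (unfold gvEnc; ring)) | (unfold gvEnc; ring)
  · -- q = (p.1, p.2 + 1): right edge from p
    left
    rw [gvEdges, List.mem_flatMap]
    refine ⟨p, by rw [mem_gvRaster]; exact hvp, ?_⟩
    rw [gvEdgesOf, List.mem_append]
    left
    have hcond : gvVal g p ≠ 0 ∧ p.2 + 1 < gvW g ∧ gvVal g (p.1, p.2 + 1) = gvVal g p := by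
      refine ⟨hnz, by have := hvq.2.2.2; rw [hq] at this; simpa using this, ?_⟩
      rw [← hq]; exact hval
    rw [if_pos hcond]
    subst hq
    simp only [List.mem_singleton, Prod.mk.injEq]
    all_goals first | trivial | (constructor <;> first | trivial | (unfold gvEnc; ring)) | (unfold gvEnc; ring)

theorem gvConn_iff_reach (g : List (List Int)) (p q : Int × Int)
    (hp : gvValid g p) (hq : gvValid g q) :
    ufConn (gvEdges g) (gvEnc g p) (gvEnc g q) ↔ gvReach g p q := by
  constructor
  · intro h
    have key : ∀ i j : Int, ufConn (gvEdges g) i j →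
        ∀ p' : Int × Int, gvValid g p' → i = gvEnc g p' →
          ∃ q' : Int × Int, gvValid g q' ∧ j = gvEnc g q' ∧ gvReach g p' q' := by
      intro i j hconn
      induction hconn with
      | refl => exact fun p' hv hi => ⟨p', hv, hi, Relation.ReflTransGen.refl⟩
      | tail h1 hstep ih =>
        intro p' hv hi
        obtain ⟨q', hq', hmid, hreach⟩ := ih p' hv hi
        rcases hstep with hs | hs
        · obtain ⟨u, v, huv, hu, hv2⟩ := gvEdge_sound g _ hs
          have : q' = u := gvEnc_inj g q' u hq' huv.1 (by exact hmid ▸ hu)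
          subst this
          exact ⟨v, huv.2.1, hv2, hreach.tail huv⟩
        · obtain ⟨u, v, huv, hu, hv2⟩ := gvEdge_sound g _ hs
          have : q' = v := gvEnc_inj g q' v hq' huv.2.1 (by exact hmid ▸ hv2)
          subst this
          exact ⟨u, huv.1, hu, hreach.tail (gvE_symm g huv)⟩
    obtain ⟨q', hq', henc, hreach⟩ := key _ _ h p hp rfl
    have : q = q' := gvEnc_inj g q q' hq hq' henc
    rw [this]; exact hreach
  · intro h
    induction h with
    | refl => exact Relation.ReflTransGen.refl
    | tail h1 hstep ih =>
      refine (ih hstep.1).tail ?_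
      rcases gvEdge_complete g _ _ hstep with h' | h'
      · exact Or.inl h'
      · exact Or.inr h'

-- ===== entries and the write pass =====
def gvEntry (z : List (List Int)) (y x : Nat) : Int := (z.getD y []).getD x 0

def gvRowsOk (g : List (List Int)) : Prop :=
  ∀ y : Nat, y < g.length → (g.headD []).length ≤ (g.getD y []).length

theorem gvGetD_set_self {α : Type} (z : List α) (i : Nat) (r d : α) (h : i < z.length) :
    (z.set i r).getD i d = r := by
  rw [List.getD_eq_getElem?_getD, List.getElem?_set_self h]
  rfl

theorem gvGetD_set_ne {α : Type} (z : List α) (i y : Nat) (r d : α) (h : i ≠ y) :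
    (z.set i r).getD y d = z.getD y d := by
  by_cases hl : i < z.length
  · rw [List.getD_eq_getElem?_getD, List.getElem?_set_ne (by omega), ← List.getD_eq_getElem?_getD]
  · rw [List.set_eq_of_length_le (by omega)]

theorem gvEntry_set2 (g z : List (List Int)) (hrows : gvRowsOk g)
    (hlen : z.length = g.length) (hrl : ∀ y : Nat, (z.getD y []).length = (g.getD y []).length)
    (c : Int × Int) (hv : gvValid g c) (v : Int) (y x : Nat) :
    gvEntry (pvSet2 z c.1 c.2 v) y x =
      if y = c.1.toNat ∧ x = c.2.toNat then v else gvEntry z y x := by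
  obtain ⟨h1, h2, h3, h4⟩ := hv
  have hyl : c.1.toNat < z.length := by simp only [gvH] at h2; omega
  have hxl : c.2.toNat < (z.getD c.1.toNat []).length := by
    rw [hrl c.1.toNat]
    have := hrows c.1.toNat (by simp only [gvH] at h2; omega)
    simp only [gvW] at h4; omega
  unfold gvEntry pvSet2
  by_cases hy : y = c.1.toNat
  · subst hy
    rw [gvGetD_set_self _ _ _ _ hyl]
    by_cases hx : x = c.2.toNat
    · subst hx
      rw [gvGetD_set_self _ _ _ _ hxl, if_pos ⟨rfl, rfl⟩]
    · rw [gvGetD_set_ne _ _ _ _ _ (fun h => hx h.symm), if_neg (fun h => hx h.2)]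
  · rw [gvGetD_set_ne _ _ _ _ _ (fun h => hy h.symm), if_neg (fun h => hy h.1)]

theorem gvSet2_len (z : List (List Int)) (a b v : Int) : (pvSet2 z a b v).length = z.length := by
  simp [pvSet2]

theorem gvSet2_rowlen (z : List (List Int)) (a b v : Int) (y : Nat) :
    ((pvSet2 z a b v).getD y []).length = (z.getD y []).length := by
  unfold pvSet2
  by_cases hy : y = a.toNat
  · subst hy
    by_cases hl : a.toNat < z.length
    · rw [gvGetD_set_self _ _ _ _ hl]
      simp
    · rw [List.set_eq_of_length_le (by omega)]
  · rw [gvGetD_set_ne _ _ _ _ _ (fun h => hy h.symm)]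

-- the replacement pass: fold over any list of valid cells, each cell written from g only
theorem gvPass_spec (g : List (List Int)) (hrows : gvRowsOk g)
    (cond : Int × Int → Bool) (f : Int × Int → Int) :
    ∀ (l : List (Int × Int)) (z : List (List Int)),
      (∀ c ∈ l, gvValid g c) →
      z.length = g.length →
      (∀ y : Nat, (z.getD y []).length = (g.getD y []).length) →
      (l.foldl (fun z c => if cond c then pvSet2 z c.1 c.2 (f c) else z) z).length = g.length ∧
      (∀ y : Nat, ((l.foldl (fun z c => if cond c then pvSet2 z c.1 c.2 (f c) else z) z).getD y []).length
          = (g.getD y []).length) ∧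
      (∀ y x : Nat,
        gvEntry (l.foldl (fun z c => if cond c then pvSet2 z c.1 c.2 (f c) else z) z) y x =
          if ((y : Int), (x : Int)) ∈ l ∧ cond ((y : Int), (x : Int)) then f ((y : Int), (x : Int))
          else gvEntry z y x) := by
  intro l
  induction l with
  | nil =>
    intro z hv hlen hrl
    refine ⟨hlen, hrl, ?_⟩
    intro y x
    simp
  | cons c t ih =>
    intro z hv hlen hrl
    have hvc : gvValid g c := hv c (by simp)
    simp only [List.foldl_cons]
    set z' := if cond c then pvSet2 z c.1 c.2 (f c) else z with hz'
    have hlen' : z'.length = g.length := by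
      rw [hz']; split
      · rw [gvSet2_len]; exact hlen
      · exact hlen
    have hrl' : ∀ y : Nat, (z'.getD y []).length = (g.getD y []).length := by
      intro y; rw [hz']; split
      · rw [gvSet2_rowlen]; exact hrl y
      · exact hrl y
    obtain ⟨hL, hR, hE⟩ := ih z' (fun c' hc' => hv c' (by simp [hc'])) hlen' hrl'
    refine ⟨hL, hR, ?_⟩
    intro y x
    rw [hE y x]
    by_cases hmem : ((y : Int), (x : Int)) ∈ t ∧ cond ((y : Int), (x : Int))
    · rw [if_pos hmem, if_pos ⟨by simp [hmem.1], hmem.2⟩]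
    · rw [if_neg hmem]
      by_cases hc : ((y : Int), (x : Int)) = c
      · subst hc
        by_cases hcnd : cond ((y : Int), (x : Int))
        · rw [if_pos ⟨by simp, hcnd⟩, hz', if_pos hcnd,
            gvEntry_set2 g z hrows hlen hrl _ hvc _ y x]
          rw [if_pos (by simp)]
        · rw [if_neg (fun hcontr => hcnd hcontr.2), hz', if_neg hcnd]
      · have hnot : ¬ (((y : Int), (x : Int)) ∈ c :: t ∧ cond ((y : Int), (x : Int))) := by
          intro hcontr
          rcases List.mem_cons.mp hcontr.1 with h | h
          · exact hc h
          · exact hmem ⟨h, hcontr.2⟩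
        rw [if_neg hnot, hz']
        by_cases hcnd : cond c
        · rw [if_pos hcnd, gvEntry_set2 g z hrows hlen hrl c hvc _ y x]
          have hne : ¬ (y = c.1.toNat ∧ x = c.2.toNat) := by
            intro ⟨hy, hx⟩
            apply hc
            obtain ⟨a, b, cc, d⟩ := hvc
            rcases c with ⟨cy, cx⟩
            simp only at a b cc d hy hx ⊢
            simp only [Prod.mk.injEq]
            constructor <;> omega
          rw [if_neg hne]
        · rw [if_neg hcnd]
-- ===== the common output description =====
def gvNeigh (g : List (List Int)) (y x : Int) : List Int :=
  ((pvNeighbors4 y x).filter (fun nb =>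
      (decide (0 ≤ nb.1) && decide (nb.1 < gvH g) && decide (0 ≤ nb.2) && decide (nb.2 < gvW g)) &&
      (pvAt g nb.1 nb.2 != 0))).map (fun nb => pvAt g nb.1 nb.2)

def gvRepl (g : List (List Int)) (y x : Int) : Int :=
  if (gvNeigh g y x).isEmpty then 0 else pvMost1 (gvNeigh g y x)

def gvSmall (g : List (List Int)) (thresh : Int) (p : Int × Int) : Prop :=
  gvValid g p ∧ gvVal g p ≠ 0 ∧ (gvSize g p : Int) ≤ thresh

def gridSpec (g : List (List Int)) (thresh : Int) (out : List (List Int)) : Prop :=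
  out.length = g.length ∧
  (∀ y : Nat, (out.getD y []).length = (g.getD y []).length) ∧
  (∀ y x : Nat,
    (gvSmall g thresh ((y : Int), (x : Int)) → gvEntry out y x = gvRepl g (y : Int) (x : Int)) ∧
    (¬ gvSmall g thresh ((y : Int), (x : Int)) → gvEntry out y x = gvEntry g y x))

theorem gridSpec_unique (g : List (List Int)) (thresh : Int) (o1 o2 : List (List Int))
    (h1 : gridSpec g thresh o1) (h2 : gridSpec g thresh o2) : o1 = o2 := by
  obtain ⟨l1, r1, e1⟩ := h1
  obtain ⟨l2, r2, e2⟩ := h2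
  apply List.ext_getElem (by omega)
  intro y hy1 hy2
  apply List.ext_getElem
  · have a1 := r1 y; have a2 := r2 y
    rw [List.getD_eq_getElem _ _ hy1] at a1
    rw [List.getD_eq_getElem _ _ hy2] at a2
    omega
  intro x hx1 hx2
  have b1 := e1 y x; have b2 := e2 y x
  have heq : gvEntry o1 y x = gvEntry o2 y x := by
    by_cases hs : gvSmall g thresh ((y : Int), (x : Int))
    · rw [b1.1 hs, b2.1 hs]
    · rw [b1.2 hs, b2.2 hs]
  unfold gvEntry at heq
  rw [List.getD_eq_getElem _ _ hy1, List.getD_eq_getElem _ _ hy2,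
      List.getD_eq_getElem _ _ hx1, List.getD_eq_getElem _ _ hx2] at heq
  exact heq

theorem pre_rowsOk (g : List (List Int)) (thresh : Int)
    (hpre : Pre_TR3_denoise_small_islands g thresh) : gvRowsOk g := by
  intro y hy
  refine hpre.2 _ ?_
  rw [List.getD_eq_getElem _ _ (by omega : y < g.length)]
  exact List.getElem_mem _

-- ===== port-B intermediate values =====
def altParent (g : List (List Int)) : List Int :=
  (PySem.List.pyRange 0 (gvH g) 1).foldl (fun par y =>
    (PySem.List.pyRange 0 (gvW g) 1).foldl (fun (par : List Int) x =>
      let c := pvAt g y x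
      if c == 0 then par
      else
        let par := if decide (x + 1 < gvW g) && (pvAt g y (x + 1) == c) then
                     pvUnion par (y * gvW g + x) (y * gvW g + x + 1) else par
        if decide (y + 1 < gvH g) && (pvAt g (y + 1) x == c) then
          pvUnion par (y * gvW g + x) ((y + 1) * gvW g + x) else par) par)
    (PySem.List.pyRange 0 (gvH g * gvW g) 1)

def altRoots (g : List (List Int)) : List Int :=
  (PySem.List.pyRange 0 (gvH g) 1).foldl (fun acc y =>
    (PySem.List.pyRange 0 (gvW g) 1).foldl (fun (acc : List Int) x =>
      if pvAt g y x != 0 then acc ++ [pvFind (altParent g) (y * gvW g + x)] else acc) acc) []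

def altSmall (g : List (List Int)) (thresh : Int) : PySem.Set Int :=
  PySem.Set.ofList
    (((PySem.Dict.counter (altRoots g)).items.filter (fun it => it.2 ≤ thresh)).map (fun it => it.1))

theorem alt_eq (g : List (List Int)) (thresh : Int) :
    TR3_denoise_small_islands_alt g thresh =
      if (altSmall g thresh).isEmpty then g.map (fun r => r)
      else
        (PySem.List.pyRange 0 (gvH g) 1).foldl (fun out y =>
          (PySem.List.pyRange 0 (gvW g) 1).foldl (fun (out : List (List Int)) x =>
            if (pvAt g y x != 0) && (altSmall g thresh).contains (pvFind (altParent g) (y * gvW g + x)) then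
              pvSet2 out y x (gvRepl g y x)
            else out) out) (g.map (fun r => r)) := rfl

theorem altParent_eq (g : List (List Int)) :
    altParent g = (gvEdges g).foldl (fun par e => pvUnion par e.1 e.2) (ufParent0 (gvN g)) := by
  rw [gvEdges, foldl_flatMap_eq]
  rw [altParent, foldl_nested_eq g
    (fun par y x =>
      let c := pvAt g y x
      if c == 0 then par
      else
        let par := if decide (x + 1 < gvW g) && (pvAt g y (x + 1) == c) then
                     pvUnion par (y * gvW g + x) (y * gvW g + x + 1) else par
        if decide (y + 1 < gvH g) && (pvAt g (y + 1) x == c) then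
          pvUnion par (y * gvW g + x) ((y + 1) * gvW g + x) else par)]
  rw [ufParent0, gvN_cast]
  refine PySem.List.foldl_congr_mem _ _ _ _ (fun par c hc => ?_)
  rcases c with ⟨y, x⟩
  simp only [gvEdgesOf, gvVal, gvEnc]
  rw [show (y + 1) * gvW g + x = y * gvW g + x + gvW g from by ring]
  by_cases h0 : pvAt g y x = 0
  · simp [h0]
  · by_cases hA : x + 1 < gvW g <;> by_cases hB : pvAt g y (x + 1) = pvAt g y x <;>
      by_cases hC : y + 1 < gvH g <;> by_cases hD : pvAt g (y + 1) x = pvAt g y x <;>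
      simp [h0, hA, hB, hC, hD]
theorem altRoot_iff (g : List (List Int)) (p q : Int × Int)
    (hp : gvValid g p) (hq : gvValid g q) :
    pvFind (altParent g) (gvEnc g p) = pvFind (altParent g) (gvEnc g q) ↔ gvReach g p q := by
  rw [← gvConn_iff_reach g p q hp hq]
  have := (ufFold_spec (gvN g) (gvEdges g) (gvEdges_inR g)).2 (gvEnc g p) (gvEnc g q)
    (gvEnc_inR g p hp) (gvEnc_inR g q hq)
  rw [altParent_eq]
  exact this

theorem altRoots_eq (g : List (List Int)) :
    altRoots g = ((gvRaster g).filter (fun c => pvAt g c.1 c.2 != 0)).map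
      (fun c => pvFind (altParent g) (c.1 * gvW g + c.2)) := by
  rw [altRoots, foldl_nested_eq g
    (fun acc y x => if pvAt g y x != 0 then acc ++ [pvFind (altParent g) (y * gvW g + x)] else acc)]
  rw [PySem.List.foldl_append_if (fun c => pvAt g c.1 c.2 != 0)
    (fun c => pvFind (altParent g) (c.1 * gvW g + c.2)) (gvRaster g) []]
  rfl

theorem altMem_roots (g : List (List Int)) (r : Int) :
    r ∈ altRoots g ↔ ∃ c : Int × Int, gvValid g c ∧ gvVal g c ≠ 0 ∧
      pvFind (altParent g) (gvEnc g c) = r := by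
  rw [altRoots_eq, List.mem_map]
  constructor
  · rintro ⟨c, hc, hr⟩
    rw [List.mem_filter] at hc
    exact ⟨c, (mem_gvRaster g c).mp hc.1, by simpa [gvVal] using hc.2, hr⟩
  · rintro ⟨c, hv, hnz, hr⟩
    exact ⟨c, List.mem_filter.mpr ⟨(mem_gvRaster g c).mpr hv, by simpa [gvVal] using hnz⟩, hr⟩

theorem altCount (g : List (List Int)) (p : Int × Int)
    (hp : gvValid g p) (hnz : gvVal g p ≠ 0) :
    (altRoots g).count (pvFind (altParent g) (gvEnc g p)) = gvSize g p := by
  rw [altRoots_eq, List.count_eq_countP, List.countP_map, List.countP_filter]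
  set pred : Int × Int → Bool := fun a =>
    ((fun x => x == pvFind (altParent g) (gvEnc g p)) ∘ fun c => pvFind (altParent g) (c.1 * gvW g + c.2)) a
      && (pvAt g a.1 a.2 != 0) with hpred
  have hset : gvComp g p = ↑(((gvRaster g).filter pred).toFinset) := by
    ext c
    simp only [Finset.coe_sort_coe, Set.mem_setOf_eq, Finset.mem_coe, List.mem_toFinset,
      List.mem_filter, mem_gvRaster]
    constructor
    · intro hreach
      have hreach' : gvReach g p c := hreach
      have hvc : gvValid g c := by
        rcases gvReach_valid g hreach' with h | h
        · exact h ▸ hp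
        · exact h
      have hvalc : gvVal g c = gvVal g p := gvReach_val g hreach'
      refine ⟨hvc, ?_⟩
      rw [hpred]
      simp only [Function.comp_apply, Bool.and_eq_true, beq_iff_eq, bne_iff_ne, ne_eq]
      constructor
      · have : (c.1 * gvW g + c.2) = gvEnc g c := rfl
        rw [this]
        exact (altRoot_iff g c p hvc hp).mpr (gvReach_symm g hreach')
      · show ¬ pvAt g c.1 c.2 = 0
        have : gvVal g c ≠ 0 := by rw [hvalc]; exact hnz
        exact this
    · rintro ⟨hvc, hpc⟩
      rw [hpred] at hpc
      simp only [Function.comp_apply, Bool.and_eq_true, beq_iff_eq, bne_iff_ne, ne_eq] at hpc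
      have : (c.1 * gvW g + c.2) = gvEnc g c := rfl
      rw [this] at hpc
      exact gvReach_symm g ((altRoot_iff g c p hvc hp).mp hpc.1)
  rw [gvSize, hset, Set.ncard_coe_finset]
  rw [List.toFinset_card_of_nodup (List.Nodup.filter _ (gvRaster_nodup g))]
  rw [List.countP_eq_length_filter]

theorem altSmall_iff (g : List (List Int)) (thresh : Int) (p : Int × Int) (hp : gvValid g p) :
    (((pvAt g p.1 p.2 != 0) &&
      (altSmall g thresh).contains (pvFind (altParent g) (gvEnc g p))) = true) ↔
    gvSmall g thresh p := by
  rw [Bool.and_eq_true, PySem.Set.contains_iff]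
  rw [altSmall, PySem.Set.mem_ofList, List.mem_map]
  constructor
  · rintro ⟨hnz, it, hit, hr⟩
    rw [List.mem_filter, PySem.Dict.items_counter, List.mem_map] at hit
    obtain ⟨⟨k, hk, hkit⟩, hle⟩ := hit
    have hnz' : gvVal g p ≠ 0 := by simpa [gvVal] using hnz
    refine ⟨hp, hnz', ?_⟩
    have hkr : it.1 = k := by rw [← hkit]
    have hcnt : it.2 = ((altRoots g).count k : Int) := by rw [← hkit]
    rw [hkr] at hr
    subst hr
    rw [hcnt] at hle
    have := altCount g p hp hnz'
    rw [this] at hle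
    exact of_decide_eq_true hle
  · rintro ⟨hv, hnz, hsz⟩
    refine ⟨by simpa [gvVal] using hnz, ?_⟩
    refine ⟨(pvFind (altParent g) (gvEnc g p), ((altRoots g).count (pvFind (altParent g) (gvEnc g p)) : Int)), ?_, rfl⟩
    rw [List.mem_filter, PySem.Dict.items_counter, List.mem_map]
    constructor
    · refine ⟨pvFind (altParent g) (gvEnc g p), ?_, rfl⟩
      rw [PySem.Set.mem_ofList]
      rw [altMem_roots]
      exact ⟨p, hp, hnz, rfl⟩
    · simp only
      rw [altCount g p hp hnz]
      exact decide_eq_true hsz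

theorem altSmall_empty_iff (g : List (List Int)) (thresh : Int) :
    ((altSmall g thresh).isEmpty = true) ↔ ∀ p : Int × Int, ¬ gvSmall g thresh p := by
  rw [List.isEmpty_iff]
  constructor
  · intro hnil p hsmall
    have := (altSmall_iff g thresh p hsmall.1).mpr hsmall
    rw [Bool.and_eq_true, PySem.Set.contains_iff] at this
    rw [hnil] at this
    exact absurd this.2 (List.not_mem_nil)
  · intro hnone
    by_contra hne
    have : ∃ r, r ∈ altSmall g thresh := by
      rcases List.exists_mem_of_ne_nil _ hne with ⟨r, hr⟩
      exact ⟨r, hr⟩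
    obtain ⟨r, hr⟩ := this
    rw [altSmall, PySem.Set.mem_ofList, List.mem_map] at hr
    obtain ⟨it, hit, hr'⟩ := hr
    rw [List.mem_filter, PySem.Dict.items_counter, List.mem_map] at hit
    obtain ⟨⟨k, hk, hkit⟩, hle⟩ := hit
    rw [PySem.Set.mem_ofList, altMem_roots] at hk
    obtain ⟨c, hvc, hnzc, hfc⟩ := hk
    apply hnone c
    refine ⟨hvc, hnzc, ?_⟩
    have hcnt : it.2 = ((altRoots g).count k : Int) := by rw [← hkit]
    rw [hcnt] at hle
    rw [← hfc] at hle
    rw [altCount g c hvc hnzc] at hle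
    exact of_decide_eq_true hle

theorem B_gridSpec (g : List (List Int)) (thresh : Int)
    (hpre : Pre_TR3_denoise_small_islands g thresh) :
    gridSpec g thresh (TR3_denoise_small_islands_alt g thresh) := by
  have hrows := pre_rowsOk g thresh hpre
  rw [alt_eq]
  by_cases hemp : (altSmall g thresh).isEmpty
  · rw [if_pos hemp, List.map_id']
    have hnone := (altSmall_empty_iff g thresh).mp hemp
    exact ⟨rfl, fun y => rfl, fun y x => ⟨fun hs => absurd hs (hnone _), fun _ => rfl⟩⟩
  · rw [if_neg hemp, List.map_id']
    rw [foldl_nested_eq g (fun out y x =>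
      if (pvAt g y x != 0) && (altSmall g thresh).contains (pvFind (altParent g) (y * gvW g + x)) then
        pvSet2 out y x (gvRepl g y x)
      else out)]
    obtain ⟨hL, hR, hE⟩ := gvPass_spec g hrows
      (fun c => (pvAt g c.1 c.2 != 0) &&
        (altSmall g thresh).contains (pvFind (altParent g) (c.1 * gvW g + c.2)))
      (fun c => gvRepl g c.1 c.2)
      (gvRaster g) g (fun c hc => (mem_gvRaster g c).mp hc) rfl (fun y => rfl)
    refine ⟨hL, hR, fun y x => ⟨?_, ?_⟩⟩
    · intro hs
      rw [hE y x, if_pos ⟨(mem_gvRaster _ _).mpr hs.1,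
        (altSmall_iff g thresh ((y : Int), (x : Int)) hs.1).mpr hs⟩]
    · intro hns
      rw [hE y x, if_neg ?_]
      rintro ⟨hmem, hcond⟩
      exact hns ((altSmall_iff g thresh ((y : Int), (x : Int)) ((mem_gvRaster _ _).mp hmem)).mp hcond)

-- ===== port-A: label grids =====
def labShape (g lab : List (List Int)) : Prop :=
  lab.length = g.length ∧ ∀ y : Nat, y < g.length → (lab.getD y []).length = (g.headD []).length

theorem pvInside_iff (g : List (List Int)) (p : Int × Int) :
    (pvInside (gvH g) (gvW g) p.1 p.2 = true) ↔ gvValid g p := by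
  unfold pvInside gvValid
  simp only [Bool.and_eq_true, decide_eq_true_eq]
  tauto

theorem labAt_set2 (g lab : List (List Int)) (hsh : labShape g lab)
    (c : Int × Int) (hc : gvValid g c) (v : Int) (q : Int × Int) (hq : gvValid g q) :
    pvAt (pvSet2 lab c.1 c.2 v) q.1 q.2 = if q = c then v else pvAt lab q.1 q.2 := by
  obtain ⟨hc1, hc2, hc3, hc4⟩ := hc
  obtain ⟨hq1, hq2, hq3, hq4⟩ := hq
  have hyl : c.1.toNat < lab.length := by rw [hsh.1]; simp only [gvH] at hc2; omega
  have hxl : c.2.toNat < (lab.getD c.1.toNat []).length := by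
    rw [hsh.2 c.1.toNat (by simp only [gvH] at hc2; omega)]
    simp only [gvW] at hc4; omega
  unfold pvAt pvSet2
  by_cases hy : q.1.toNat = c.1.toNat
  · rw [hy, gvGetD_set_self _ _ _ _ hyl]
    by_cases hx : q.2.toNat = c.2.toNat
    · rw [hx, gvGetD_set_self _ _ _ _ hxl, if_pos ?_]
      have h1 : q.1 = c.1 := by omega
      have h2 : q.2 = c.2 := by omega
      exact Prod.ext h1 h2
    · rw [gvGetD_set_ne _ _ _ _ _ (fun he => hx he.symm), if_neg ?_]
      intro h; rw [h] at hx; exact hx rfl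
  · rw [gvGetD_set_ne _ _ _ _ _ (fun he => hy he.symm), if_neg ?_]
    intro h; rw [h] at hy; exact hy rfl

theorem labShape_set2 (g lab : List (List Int)) (hsh : labShape g lab)
    (c : Int × Int) (v : Int) : labShape g (pvSet2 lab c.1 c.2 v) := by
  refine ⟨by rw [gvSet2_len]; exact hsh.1, ?_⟩
  intro y hy
  rw [gvSet2_rowlen]
  exact hsh.2 y hy

theorem gvComp_mem_val (g : List (List Int)) (s : Int × Int) (hvs : gvValid g s)
    (hnz : gvVal g s ≠ 0) :
    ∀ u ∈ gvComp g s, gvValid g u ∧ gvVal g u = gvVal g s ∧ gvVal g u ≠ 0 := by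
  intro u hu
  have hval := gvReach_val g hu
  rcases gvReach_valid g hu with h | h
  · exact ⟨h ▸ hvs, hval, by omega⟩
  · exact ⟨h, hval, by omega⟩

theorem gvCard_le_size (g : List (List Int)) (s : Int × Int) (N : Finset (Int × Int))
    (hN : ↑N ⊆ gvComp g s) : N.card ≤ gvSize g s := by
  rw [gvSize, ← Set.ncard_coe_finset]
  exact Set.ncard_le_ncard hN (gvComp_finite g s)

-- one pop of the BFS while-loop: folding the neighbor list
theorem bfs_inner (g : List (List Int)) (s : Int × Int) (col nxt : Int) (lab0 : List (List Int))
    (hvs : gvValid g s) (hnz : gvVal g s ≠ 0) (hcol : col = gvVal g s) (hnxt : nxt ≠ 0)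
    (h0 : ∀ p ∈ gvComp g s, pvAt lab0 p.1 p.2 = 0)
    (u : Int × Int) (hu : u ∈ gvComp g s) :
    ∀ (nbs : List (Int × Int)),
      (∀ nb ∈ nbs, nb ∈ pvNeighbors4 u.1 u.2) →
      ∀ (lab : List (List Int)) (qq : List (Int × Int)) (N : Finset (Int × Int)),
      labShape g lab →
      (↑N ⊆ gvComp g s) →
      (∀ p, gvValid g p → pvAt lab p.1 p.2 = if p ∈ N then nxt else pvAt lab0 p.1 p.2) →
      (∀ c ∈ qq, c ∈ N) → qq.Nodup →
      ∃ (N' : Finset (Int × Int)) (Δ : List (Int × Int)),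
        (nbs.foldl (fun (st : List (List Int) × List (Int × Int)) nb =>
          if pvInside (gvH g) (gvW g) nb.1 nb.2 && (pvAt g nb.1 nb.2 == col) && (pvAt st.1 nb.1 nb.2 == 0) then
            (pvSet2 st.1 nb.1 nb.2 nxt, st.2 ++ [nb])
          else st) (lab, qq)).2 = qq ++ Δ ∧
        N ⊆ N' ∧ (↑N' ⊆ gvComp g s) ∧
        (∀ c ∈ Δ, c ∈ N') ∧ (qq ++ Δ).Nodup ∧
        (N'.card = N.card + Δ.length) ∧
        labShape g (nbs.foldl (fun (st : List (List Int) × List (Int × Int)) nb =>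
          if pvInside (gvH g) (gvW g) nb.1 nb.2 && (pvAt g nb.1 nb.2 == col) && (pvAt st.1 nb.1 nb.2 == 0) then
            (pvSet2 st.1 nb.1 nb.2 nxt, st.2 ++ [nb])
          else st) (lab, qq)).1 ∧
        (∀ p, gvValid g p → pvAt (nbs.foldl (fun (st : List (List Int) × List (Int × Int)) nb =>
          if pvInside (gvH g) (gvW g) nb.1 nb.2 && (pvAt g nb.1 nb.2 == col) && (pvAt st.1 nb.1 nb.2 == 0) then
            (pvSet2 st.1 nb.1 nb.2 nxt, st.2 ++ [nb])
          else st) (lab, qq)).1 p.1 p.2 = if p ∈ N' then nxt else pvAt lab0 p.1 p.2) ∧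
        (∀ r ∈ nbs, gvE g u r → r ∈ N') ∧
        (∀ c ∈ N', c ∈ N ∨ c ∈ Δ) := by
  intro nbs
  induction nbs with
  | nil =>
    intro hnbs lab qq N hsh hNsub hlab hqq hnodup
    refine ⟨N, [], by simp, le_refl N, hNsub, by simp, by simpa using hnodup, by simp, hsh, hlab,
      by simp, fun c hc => Or.inl hc⟩
  | cons nb t ih =>
    intro hnbs lab qq N hsh hNsub hlab hqq hnodup
    have hadj : nb ∈ pvNeighbors4 u.1 u.2 := hnbs nb (by simp)
    have hust := gvComp_mem_val g s hvs hnz u hu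
    simp only [List.foldl_cons]
    by_cases hcond : (pvInside (gvH g) (gvW g) nb.1 nb.2 && (pvAt g nb.1 nb.2 == col) &&
        (pvAt lab nb.1 nb.2 == 0)) = true
    · -- the neighbor is labeled and enqueued
      simp only [Bool.and_eq_true, beq_iff_eq] at hcond
      have hvnb : gvValid g nb := (pvInside_iff g nb).mp hcond.1.1
      have hvalnb : gvVal g nb = gvVal g u := by
        rw [hust.2.1, ← hcol]; exact hcond.1.2
      have hE : gvE g u nb := ⟨hust.1, hvnb, hust.2.2, hvalnb, hadj⟩
      have hnbcomp : nb ∈ gvComp g s := Relation.ReflTransGen.tail hu hE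
      have hnbN : nb ∉ N := by
        intro hmem
        have := hlab nb hvnb
        rw [if_pos hmem] at this
        rw [this] at hcond
        exact hnxt hcond.2
      rw [if_pos (by simp [hcond])]
      have hsh' := labShape_set2 g lab hsh nb nxt
      have hlab' : ∀ p, gvValid g p →
          pvAt (pvSet2 lab nb.1 nb.2 nxt) p.1 p.2 =
            if p ∈ insert nb N then nxt else pvAt lab0 p.1 p.2 := by
        intro p hp
        rw [labAt_set2 g lab hsh nb hvnb nxt p hp]
        by_cases hpe : p = nb
        · rw [if_pos hpe, if_pos (by simp [hpe])]
        · rw [if_neg hpe, hlab p hp]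
          by_cases hpN : p ∈ N
          · rw [if_pos hpN, if_pos (Finset.mem_insert.mpr (Or.inr hpN))]
          · rw [if_neg hpN, if_neg (fun hmem => by
              rcases Finset.mem_insert.mp hmem with h | h
              · exact hpe h
              · exact hpN h)]
      obtain ⟨N', Δ, hfold, hsub, hsubc, hΔ, hnd, hcard, hshf, hlabf, hcov, hnew⟩ :=
        ih (fun x hx => hnbs x (by simp [hx])) (pvSet2 lab nb.1 nb.2 nxt) (qq ++ [nb])
          (insert nb N) hsh'
          (by
            intro c hc
            rw [Finset.coe_insert, Set.mem_insert_iff] at hc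
            rcases hc with rfl | hc
            · exact hnbcomp
            · exact hNsub hc)
          hlab'
          (by
            intro c hc
            rw [List.mem_append] at hc
            rcases hc with hc | hc
            · exact Finset.mem_insert.mpr (Or.inr (hqq c hc))
            · simp at hc; subst hc; exact Finset.mem_insert_self _ _)
          (by
            rw [List.nodup_append]
            refine ⟨hnodup, by simp, ?_⟩
            intro c hc b hb
            rw [List.mem_singleton] at hb
            subst hb
            exact fun hce => hnbN (hce ▸ hqq c hc))
      refine ⟨N', nb :: Δ, ?_, ?_, hsubc, ?_, ?_, ?_, hshf, hlabf, ?_, ?_⟩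
      · rw [hfold, List.append_assoc]; rfl
      · exact fun c hc => hsub (Finset.mem_insert.mpr (Or.inr hc))
      · intro c hc
        rcases List.mem_cons.mp hc with rfl | hc
        · exact hsub (Finset.mem_insert_self _ _)
        · exact hΔ c hc
      · have : qq ++ nb :: Δ = (qq ++ [nb]) ++ Δ := by rw [List.append_assoc]; rfl
        rw [this]; exact hnd
      · rw [hcard, Finset.card_insert_of_notMem hnbN]
        simp [Nat.add_comm, Nat.add_assoc, Nat.add_left_comm]
      · intro r hr hEr
        rcases List.mem_cons.mp hr with rfl | hr
        · exact hsub (Finset.mem_insert_self _ _)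
        · exact hcov r hr hEr
      · intro c hc
        rcases hnew c hc with hc' | hc'
        · rcases Finset.mem_insert.mp hc' with rfl | hc''
          · exact Or.inr (by simp)
          · exact Or.inl hc''
        · exact Or.inr (by simp [hc'])
    · -- skipped neighbor
      rw [if_neg hcond]
      obtain ⟨N', Δ, hfold, hsub, hsubc, hΔ, hnd, hcard, hshf, hlabf, hcov, hnew⟩ :=
        ih (fun x hx => hnbs x (by simp [hx])) lab qq N hsh hNsub hlab hqq hnodup
      refine ⟨N', Δ, hfold, hsub, hsubc, hΔ, hnd, hcard, hshf, hlabf, ?_, hnew⟩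
      intro r hr hEr
      rcases List.mem_cons.mp hr with rfl | hr
      · -- the skipped neighbor: show it is already in N
        simp only [Bool.and_eq_true, beq_iff_eq, not_and] at hcond
        have hEr2 := hEr
        obtain ⟨huv, hvr, hunz, hvalr, hadjr⟩ := hEr2
        have hins : pvInside (gvH g) (gvW g) r.1 r.2 = true := (pvInside_iff g r).mpr hvr
        have hcolr : pvAt g r.1 r.2 = col := by
          rw [hcol]
          show gvVal g r = gvVal g s
          rw [hvalr, hust.2.1]
        have hrcomp : r ∈ gvComp g s := Relation.ReflTransGen.tail hu hEr
        have hlabr : pvAt lab r.1 r.2 = if r ∈ N then nxt else pvAt lab0 r.1 r.2 := hlab r hvr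
        by_cases hrN : r ∈ N
        · exact hsub hrN
        · exfalso
          rw [if_neg hrN, h0 r hrcomp] at hlabr
          exact hcond (by simp [hins, hcolr]) (by simp [hlabr])
      · exact hcov r hr hEr

theorem bfs_spec (g : List (List Int)) (s : Int × Int) (col nxt : Int) (lab0 : List (List Int))
    (hvs : gvValid g s) (hnz : gvVal g s ≠ 0) (hcol : col = gvVal g s) (hnxt : nxt ≠ 0)
    (h0 : ∀ p ∈ gvComp g s, pvAt lab0 p.1 p.2 = 0) :
    ∀ (fuel : Nat) (q : List (Int × Int)) (lab : List (List Int)) (cnt : Int)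
      (N : Finset (Int × Int)),
      labShape g lab → s ∈ N → (↑N ⊆ gvComp g s) →
      (∀ p, gvValid g p → pvAt lab p.1 p.2 = if p ∈ N then nxt else pvAt lab0 p.1 p.2) →
      (∀ c ∈ q, c ∈ N) → q.Nodup →
      (cnt + (q.length : Int) = (N.card : Int)) →
      (∀ p ∈ N, p ∉ q → ∀ r, gvE g p r → r ∈ N) →
      ((gvSize g s - N.card) + q.length < fuel) →
      labShape g (pvBfs g (gvH g) (gvW g) col nxt fuel q lab cnt).1 ∧
      (pvBfs g (gvH g) (gvW g) col nxt fuel q lab cnt).2 = (gvSize g s : Int) ∧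
      (∀ p, gvValid g p →
        (p ∈ gvComp g s → pvAt (pvBfs g (gvH g) (gvW g) col nxt fuel q lab cnt).1 p.1 p.2 = nxt) ∧
        (p ∉ gvComp g s → pvAt (pvBfs g (gvH g) (gvW g) col nxt fuel q lab cnt).1 p.1 p.2 =
          pvAt lab0 p.1 p.2)) := by
  intro fuel
  induction fuel with
  | zero =>
    intro q lab cnt N _ _ _ _ _ _ _ _ hfuel
    exact absurd hfuel (Nat.not_lt_zero _)
  | succ fuel ih =>
    intro q lab cnt N hsh hsN hNsub hlab hq hnodup hcnt hclosed hfuel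
    match q with
    | [] =>
      have hNeq : gvComp g s = ↑N := by
        apply Set.Subset.antisymm ?_ hNsub
        intro r hr
        have : ∀ r', gvReach g s r' → r' ∈ N := by
          intro r' hr'
          induction hr' with
          | refl => exact hsN
          | tail h1 hstep ihr =>
            exact hclosed _ ihr (List.not_mem_nil) _ hstep
        exact this r hr
      have hsize : gvSize g s = N.card := by
        rw [gvSize, hNeq, Set.ncard_coe_finset]
      refine ⟨hsh, ?_, ?_⟩
      · show cnt = (gvSize g s : Int)
        rw [hsize]
        simpa using hcnt
      · intro p hp
        constructor
        · intro hpc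
          show pvAt lab p.1 p.2 = _
          rw [hlab p hp, if_pos (by rw [hNeq] at hpc; exact hpc)]
        · intro hpc
          show pvAt lab p.1 p.2 = _
          rw [hlab p hp, if_neg (by intro hmem; exact hpc (hNeq ▸ Finset.mem_coe.mpr hmem))]
    | u :: rest =>
      have huN : u ∈ N := hq u (by simp)
      have hucomp : u ∈ gvComp g s := hNsub huN
      obtain ⟨N', Δ, hfold, hsub, hsubc, hΔ, hnd, hcard, hshf, hlabf, hcov, hnew⟩ :=
        bfs_inner g s col nxt lab0 hvs hnz hcol hnxt h0 u hucomp
          (pvNeighbors4 u.1 u.2) (fun nb hnb => hnb) lab rest N hsh hNsub hlab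
          (fun c hc => hq c (by simp [hc]))
          ((List.nodup_cons.mp hnodup).2)
      have hrec := ih (rest ++ Δ)
        ((pvNeighbors4 u.1 u.2).foldl (fun (st : List (List Int) × List (Int × Int)) nb =>
          if pvInside (gvH g) (gvW g) nb.1 nb.2 && (pvAt g nb.1 nb.2 == col) && (pvAt st.1 nb.1 nb.2 == 0) then
            (pvSet2 st.1 nb.1 nb.2 nxt, st.2 ++ [nb])
          else st) (lab, rest)).1 (cnt + 1) N' hshf (hsub hsN) hsubc hlabf
        (by
          intro c hc
          rcases List.mem_append.mp hc with hc | hc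
          · exact hsub (hq c (by simp [hc]))
          · exact hΔ c hc)
        hnd
        (by
          have h1 : (rest ++ Δ).length = rest.length + Δ.length := List.length_append
          have h2 : (u :: rest).length = rest.length + 1 := rfl
          rw [h2] at hcnt
          rw [h1, hcard]
          push_cast at hcnt ⊢
          omega)
        (by
          intro p hpN' hpq r hEr
          rcases hnew p hpN' with hpN | hpΔ
          · by_cases hpu : p = u
            · subst hpu
              exact hcov r hEr.2.2.2.2 hEr
            · have : p ∉ u :: rest := by
                intro hmem
                rcases List.mem_cons.mp hmem with h | h
                · exact hpu h
                · exact hpq (List.mem_append.mpr (Or.inl h))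
              exact hsub (hclosed p hpN this r hEr)
          · exact absurd (List.mem_append.mpr (Or.inr hpΔ)) hpq)
        (by
          have hNle := gvCard_le_size g s N hNsub
          have hNle' := gvCard_le_size g s N' hsubc
          have h1 : (rest ++ Δ).length = rest.length + Δ.length := List.length_append
          have h2 : (u :: rest).length = rest.length + 1 := rfl
          rw [h2] at hfuel
          rw [h1, hcard]
          omega)
      have hstep : pvBfs g (gvH g) (gvW g) col nxt (fuel + 1) (u :: rest) lab cnt =
          pvBfs g (gvH g) (gvW g) col nxt fuel
            ((pvNeighbors4 u.1 u.2).foldl (fun (st : List (List Int) × List (Int × Int)) nb =>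
              if pvInside (gvH g) (gvW g) nb.1 nb.2 && (pvAt g nb.1 nb.2 == col) && (pvAt st.1 nb.1 nb.2 == 0) then
                (pvSet2 st.1 nb.1 nb.2 nxt, st.2 ++ [nb])
              else st) (lab, rest)).2
            ((pvNeighbors4 u.1 u.2).foldl (fun (st : List (List Int) × List (Int × Int)) nb =>
              if pvInside (gvH g) (gvW g) nb.1 nb.2 && (pvAt g nb.1 nb.2 == col) && (pvAt st.1 nb.1 nb.2 == 0) then
                (pvSet2 st.1 nb.1 nb.2 nxt, st.2 ++ [nb])
              else st) (lab, rest)).1 (cnt + 1) := rfl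
      rw [hstep, hfold]
      exact hrec

-- ===== port-A: the components() scan =====
def compBody (g : List (List Int))
    (st : List (List Int) × Int × PySem.Dict Int (Int × Int × Int)) (y x : Int) :
    List (List Int) × Int × PySem.Dict Int (Int × Int × Int) :=
  if (pvAt g y x == 0) || (pvAt st.1 y x != 0) then st
  else
    let col := pvAt g y x
    let r := pvBfs g (gvH g) (gvW g) col st.2.1 (g.length * (g.headD []).length + 1)
               [(y, x)] (pvSet2 st.1 y x st.2.1) 0
    (r.1, st.2.1 + 1, st.2.2.insert st.2.1 (col, r.2, y * gvW g + x))

def compInit (g : List (List Int)) : List (List Int) × Int × PySem.Dict Int (Int × Int × Int) :=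
  ((List.range g.length).map (fun _ => List.replicate (g.headD []).length (0 : Int)), 1,
    PySem.Dict.empty)

def compsA (g : List (List Int)) : List (List Int) × Int × PySem.Dict Int (Int × Int × Int) :=
  (PySem.List.pyRange 0 (gvH g) 1).foldl (fun st y =>
    (PySem.List.pyRange 0 (gvW g) 1).foldl (fun st x => compBody g st y x) st) (compInit g)

def compInv (g : List (List Int))
    (σ : List (List Int) × Int × PySem.Dict Int (Int × Int × Int)) : Prop :=
  labShape g σ.1 ∧ 1 ≤ σ.2.1 ∧
  (∀ p, gvValid g p → pvAt σ.1 p.1 p.2 ≠ 0 →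
    gvVal g p ≠ 0 ∧ 1 ≤ pvAt σ.1 p.1 p.2 ∧ pvAt σ.1 p.1 p.2 < σ.2.1) ∧
  (∀ p q, gvValid g p → pvAt σ.1 p.1 p.2 ≠ 0 → gvReach g p q →
    pvAt σ.1 q.1 q.2 = pvAt σ.1 p.1 p.2) ∧
  (∀ p, gvValid g p → pvAt σ.1 p.1 p.2 ≠ 0 →
    ∃ c i, σ.2.2.get? (pvAt σ.1 p.1 p.2) = some (c, (gvSize g p : Int), i)) ∧
  (∀ k v, σ.2.2.get? k = some v → 1 ≤ k ∧ k < σ.2.1) ∧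
  σ.2.2.keys.Nodup ∧
  (∀ k v, σ.2.2.get? k = some v → ∃ p, gvValid g p ∧ pvAt σ.1 p.1 p.2 = k ∧
    v.2.1 = (gvSize g p : Int))

theorem gvGetD_map_const {α β : Type} (l : List α) (i : Nat) (r d : β) :
    (l.map (fun _ => r)).getD i d = if i < l.length then r else d := by
  by_cases h : i < l.length
  · rw [List.getD_eq_getElem?_getD, List.getElem?_map,
      List.getElem?_eq_getElem h]
    simp [h]
  · rw [List.getD_eq_getElem?_getD, List.getElem?_eq_none (by simpa using Nat.le_of_not_lt h)]
    simp [h]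

theorem gvGetD_replicate {α : Type} (n i : Nat) (a d : α) :
    (List.replicate n a).getD i d = if i < n then a else d := by
  by_cases h : i < n
  · rw [List.getD_eq_getElem?_getD, List.getElem?_eq_getElem (by simpa using h)]
    simp [List.getElem_replicate, h]
  · rw [List.getD_eq_getElem?_getD, List.getElem?_eq_none (by simpa using Nat.le_of_not_lt h)]
    simp [h]

theorem compInit_inv (g : List (List Int)) : compInv g (compInit g) := by
  have hz : ∀ p : Int × Int, pvAt (compInit g).1 p.1 p.2 = 0 := by
    intro p
    show ((((List.range g.length).map (fun _ => List.replicate (g.headD []).length (0 : Int)))).getD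
      p.1.toNat []).getD p.2.toNat 0 = 0
    rw [show ((List.range g.length).map (fun _ => List.replicate (g.headD []).length (0 : Int)))
        = (List.range g.length).map (fun _ => List.replicate (g.headD []).length (0 : Int)) from rfl]
    rw [gvGetD_map_const]
    by_cases h : p.1.toNat < (List.range g.length).length
    · rw [if_pos h, gvGetD_replicate]
      split <;> rfl
    · rw [if_neg h]
      rfl
  refine ⟨⟨by simp [compInit], ?_⟩, le_refl 1, ?_, ?_, ?_, ?_, ?_, ?_⟩
  · intro y hy
    show (((List.range g.length).map (fun _ => List.replicate (g.headD []).length (0 : Int))).getD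
      y []).length = _
    rw [gvGetD_map_const, if_pos (by simpa using hy)]
    simp
  · intro p _ hne; exact absurd (hz p) hne
  · intro p q _ hne; exact absurd (hz p) hne
  · intro p _ hne; exact absurd (hz p) hne
  · intro k v h; rw [show (compInit g).2.2 = PySem.Dict.empty from rfl, PySem.Dict.get?_empty] at h; cases h
  · show (PySem.Dict.empty : PySem.Dict Int (Int × Int × Int)).keys.Nodup
    simp [PySem.Dict.keys, PySem.Dict.empty]
  · intro k v h; rw [show (compInit g).2.2 = PySem.Dict.empty from rfl, PySem.Dict.get?_empty] at h; cases h

theorem comp_step (g : List (List Int)) (σ : List (List Int) × Int × PySem.Dict Int (Int × Int × Int))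
    (c : Int × Int) (hc : gvValid g c) (hinv : compInv g σ) :
    compInv g (compBody g σ c.1 c.2) ∧
    (∀ p, gvValid g p → pvAt σ.1 p.1 p.2 ≠ 0 →
      pvAt (compBody g σ c.1 c.2).1 p.1 p.2 = pvAt σ.1 p.1 p.2) ∧
    (gvVal g c ≠ 0 → pvAt (compBody g σ c.1 c.2).1 c.1 c.2 ≠ 0) := by
  obtain ⟨K1, K2, K3, K4, K5, K6, K7, K9⟩ := hinv
  by_cases hskip : ((pvAt g c.1 c.2 == 0) || (pvAt σ.1 c.1 c.2 != 0)) = true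
  · rw [compBody, if_pos hskip]
    refine ⟨⟨K1, K2, K3, K4, K5, K6, K7, K9⟩, fun p _ _ => rfl, ?_⟩
    intro hnz
    rcases Bool.or_eq_true_iff.mp hskip with h | h
    · exact absurd (by simpa [gvVal] using h) hnz
    · simpa using h
  · have hskip' := hskip
    simp only [Bool.or_eq_true, not_or, beq_iff_eq, bne_iff_ne, ne_eq, not_not] at hskip'
    obtain ⟨hnz0, hlab0⟩ := hskip'
    have hnzc : gvVal g c ≠ 0 := by simpa [gvVal] using hnz0
    have h0 : ∀ p ∈ gvComp g c, pvAt σ.1 p.1 p.2 = 0 := by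
      intro p hp
      by_contra hne
      have hvp := (gvComp_mem_val g c hc hnzc p hp).1
      have := K4 p c hvp hne (gvReach_symm g hp)
      rw [this] at hlab0
      exact hne hlab0
    have hbfs := bfs_spec g c (pvAt g c.1 c.2) σ.2.1 σ.1 hc hnzc rfl (show σ.2.1 ≠ 0 by omega) h0
      (g.length * (g.headD []).length + 1) [(c.1, c.2)]
      (pvSet2 σ.1 c.1 c.2 σ.2.1) 0 {c}
      (labShape_set2 g σ.1 K1 c σ.2.1)
      (Finset.mem_singleton_self c)
      (by
        intro p hp
        rw [Finset.coe_singleton, Set.mem_singleton_iff] at hp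
        subst hp
        exact Relation.ReflTransGen.refl)
      (by
        intro p hp
        rw [labAt_set2 g σ.1 K1 c hc σ.2.1 p hp]
        by_cases hpe : p = c
        · rw [if_pos hpe, if_pos (Finset.mem_singleton.mpr hpe)]
        · rw [if_neg hpe, if_neg (fun hm => hpe (Finset.mem_singleton.mp hm))])
      (by intro a ha; rw [List.mem_singleton] at ha; subst ha; exact Finset.mem_singleton_self c)
      (by simp)
      (by simp)
      (by
        intro p hp hpq r hEr
        exfalso
        apply hpq
        rw [Finset.mem_singleton] at hp
        simp [hp])
      (by
        show (gvSize g c - Finset.card {c}) + (List.length [(c.1, c.2)]) <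
          g.length * (g.headD []).length + 1
        have h1 := gvSize_le g c hc
        have h2 := gvCellFinset_card g
        have h3 : Finset.card ({c} : Finset (Int × Int)) = 1 := Finset.card_singleton c
        simp only [List.length_cons, List.length_nil, h3]
        rw [← h2]
        have h4 : 0 < gvSize g c := by
          rw [gvSize, Set.ncard_pos (gvComp_finite g c)]
          exact ⟨c, Relation.ReflTransGen.refl⟩
        omega)
    set lab' := (pvBfs g (gvH g) (gvW g) (pvAt g c.1 c.2) σ.2.1
      (g.length * (g.headD []).length + 1) [(c.1, c.2)] (pvSet2 σ.1 c.1 c.2 σ.2.1) 0).1 with hlab'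
    set cnt' := (pvBfs g (gvH g) (gvW g) (pvAt g c.1 c.2) σ.2.1
      (g.length * (g.headD []).length + 1) [(c.1, c.2)] (pvSet2 σ.1 c.1 c.2 σ.2.1) 0).2 with hcnt'
    obtain ⟨hsh', hcval, hlabs⟩ := hbfs
    have hbody : compBody g σ c.1 c.2 =
        (lab', σ.2.1 + 1, σ.2.2.insert σ.2.1 (pvAt g c.1 c.2, cnt', c.1 * gvW g + c.2)) := by
      rw [compBody, if_neg hskip]
    rw [hbody]
    have hpres : ∀ p, gvValid g p → pvAt σ.1 p.1 p.2 ≠ 0 → pvAt lab' p.1 p.2 = pvAt σ.1 p.1 p.2 := by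
      intro p hp hne
      have hpc : p ∉ gvComp g c := fun hm => hne (h0 p hm)
      exact (hlabs p hp).2 hpc
    have hnotin : ∀ {p q : Int × Int}, p ∉ gvComp g c → gvValid g p → gvReach g p q →
        q ∉ gvComp g c := by
      intro p q hpc hvp hpq hqc
      exact hpc (gvReach_trans g hqc (gvReach_symm g hpq))
    have hkeyfresh : σ.2.2.contains σ.2.1 = false := by
      by_contra hcon
      have : σ.2.2.contains σ.2.1 = true := by
        cases h : σ.2.2.contains σ.2.1
        · exact absurd h hcon
        · rfl
      have hne : σ.2.2.get? σ.2.1 ≠ none := by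
        intro hnone
        rw [PySem.Dict.get?_eq_none_iff_contains] at hnone
        rw [this] at hnone
        cases hnone
      rcases hopt : σ.2.2.get? σ.2.1 with _ | v
      · exact hne hopt
      · have := K6 _ _ hopt
        omega
    refine ⟨⟨hsh', by change (1:Int) ≤ σ.2.1 + 1; omega, ?_, ?_, ?_, ?_, ?_, ?_⟩, hpres, ?_⟩
    · -- K3
      intro p hp hne
      by_cases hpc : p ∈ gvComp g c
      · have := (hlabs p hp).1 hpc
        rw [this]
        refine ⟨(gvComp_mem_val g c hc hnzc p hpc).2.2, by omega, ?_⟩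
        change _ < σ.2.1 + 1
        omega
      · rw [(hlabs p hp).2 hpc] at hne ⊢
        have := K3 p hp hne
        refine ⟨this.1, by omega, ?_⟩
        change _ < σ.2.1 + 1
        omega
    · -- K4
      intro p q hp hne hpq
      by_cases hpc : p ∈ gvComp g c
      · have hqc : q ∈ gvComp g c := gvReach_trans g hpc hpq
        have hvq := (gvComp_mem_val g c hc hnzc q hqc).1
        rw [(hlabs p hp).1 hpc, (hlabs q hvq).1 hqc]
      · have hqc := hnotin hpc hp hpq
        rcases gvReach_valid g hpq with heq | hvq
        · rw [← heq]
        · rw [(hlabs p hp).2 hpc] at hne ⊢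
          rw [(hlabs q hvq).2 hqc]
          exact K4 p q hp hne hpq
    · -- K5
      intro p hp hne
      by_cases hpc : p ∈ gvComp g c
      · have hl := (hlabs p hp).1 hpc
        rw [hl]
        refine ⟨pvAt g c.1 c.2, c.1 * gvW g + c.2, ?_⟩
        rw [PySem.Dict.get?_insert_self]
        have : gvSize g p = gvSize g c := by
          rw [gvSize, gvSize, gvComp_eq_of_reach g (hpc : gvReach g c p)]
        rw [hcval] at *
        rw [this]
      · have hl := (hlabs p hp).2 hpc
        rw [hl] at hne ⊢
        obtain ⟨cv, iv, hent⟩ := K5 p hp hne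
        have hlt := (K6 _ _ hent).2
        refine ⟨cv, iv, ?_⟩
        rw [PySem.Dict.get?_insert_of_ne _ _ (by omega)]
        exact hent
    · -- K6
      intro k v hkv
      by_cases hke : k = σ.2.1
      · subst hke
        change 1 ≤ σ.2.1 ∧ σ.2.1 < σ.2.1 + 1
        omega
      · rw [PySem.Dict.get?_insert_of_ne _ _ hke] at hkv
        have := K6 _ _ hkv
        change 1 ≤ k ∧ k < σ.2.1 + 1
        omega
    · -- K7
      rw [PySem.Dict.keys_insert_of_not_contains _ _ hkeyfresh]
      rw [List.nodup_append]
      refine ⟨K7, by simp, ?_⟩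
      intro a ha b hb
      rw [List.mem_singleton] at hb
      subst hb
      intro he
      subst he
      exact absurd ((PySem.Dict.contains_iff_mem_keys _ _).mpr ha) (by rw [hkeyfresh]; simp)
    · -- K9
      intro k v hkv
      by_cases hke : k = σ.2.1
      · subst hke
        rw [PySem.Dict.get?_insert_self] at hkv
        refine ⟨c, hc, (hlabs c hc).1 Relation.ReflTransGen.refl, ?_⟩
        injection hkv with hv
        rw [← hv]
        exact hcval
      · rw [PySem.Dict.get?_insert_of_ne _ _ hke] at hkv
        obtain ⟨p, hvp, hlp, hsz⟩ := K9 _ _ hkv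
        have hne : pvAt σ.1 p.1 p.2 ≠ 0 := by
          rw [hlp]
          intro h0'
          have := (K6 _ _ hkv).1
          omega
        refine ⟨p, hvp, ?_, hsz⟩
        rw [hpres p hvp hne]
        exact hlp
    · -- newly fired cell is labeled
      intro _
      rw [(hlabs c hc).1 Relation.ReflTransGen.refl]
      omega

theorem comp_loop (g : List (List Int)) :
    ∀ (l : List (Int × Int)) (σ : List (List Int) × Int × PySem.Dict Int (Int × Int × Int)),
      (∀ c ∈ l, gvValid g c) → compInv g σ →
      compInv g (l.foldl (fun st c => compBody g st c.1 c.2) σ) ∧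
      (∀ p, gvValid g p → pvAt σ.1 p.1 p.2 ≠ 0 →
        pvAt (l.foldl (fun st c => compBody g st c.1 c.2) σ).1 p.1 p.2 = pvAt σ.1 p.1 p.2) ∧
      (∀ c ∈ l, gvVal g c ≠ 0 →
        pvAt (l.foldl (fun st c => compBody g st c.1 c.2) σ).1 c.1 c.2 ≠ 0) := by
  intro l
  induction l with
  | nil => exact fun σ _ hinv => ⟨hinv, fun p _ _ => rfl, by simp⟩
  | cons c t ih =>
    intro σ hval hinv
    have hc : gvValid g c := hval c (by simp)
    obtain ⟨hinv', hpres', hlabc⟩ := comp_step g σ c hc hinv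
    simp only [List.foldl_cons]
    obtain ⟨hinvf, hpresf, hlabf⟩ := ih (compBody g σ c.1 c.2)
      (fun c' hc' => hval c' (by simp [hc'])) hinv'
    refine ⟨hinvf, ?_, ?_⟩
    · intro p hp hne
      rw [hpresf p hp (by rw [hpres' p hp hne]; exact hne), hpres' p hp hne]
    · intro c' hc' hnz'
      rcases List.mem_cons.mp hc' with rfl | hmem
      · exact fun hzero => (hlabc hnz') (by
          rw [← hpresf c' hc (hlabc hnz')]; exact hzero)
      · exact hlabf c' hmem hnz'

-- final characterization of components()
theorem comps_final (g : List (List Int)) :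
    compInv g (compsA g) ∧
    (∀ p, gvValid g p → gvVal g p ≠ 0 → pvAt (compsA g).1 p.1 p.2 ≠ 0) := by
  have hA : compsA g = (gvRaster g).foldl (fun st c => compBody g st c.1 c.2) (compInit g) := by
    rw [compsA, foldl_nested_eq g (fun st y x => compBody g st y x)]
  obtain ⟨hinv, _, hlab⟩ := comp_loop g (gvRaster g) (compInit g)
    (fun c hc => (mem_gvRaster g c).mp hc) (compInit_inv g)
  rw [hA]
  exact ⟨hinv, fun p hp hnz => hlab p ((mem_gvRaster g p).mpr hp) hnz⟩

def smallAList (g : List (List Int)) (thresh : Int) : List Int :=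
  (((compsA g).2.2).items.filter (fun it => it.2.2.1 ≤ thresh)).map (fun it => it.1)

theorem A_eq (g : List (List Int)) (thresh : Int) :
    TR3_denoise_small_islands g thresh =
      if (smallAList g thresh).isEmpty then g.map (fun r => r)
      else
        (PySem.List.pyRange 0 (gvH g) 1).foldl (fun z y =>
          (PySem.List.pyRange 0 (gvW g) 1).foldl (fun (z : List (List Int)) x =>
            if (smallAList g thresh).contains (pvAt (compsA g).1 y x) then
              pvSet2 z y x
                (if ((pvNeighbors4 y x).foldl (fun ne nb =>
                    if pvInside (gvH g) (gvW g) nb.1 nb.2 && (pvAt g nb.1 nb.2 != 0) then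
                      ne ++ [pvAt g nb.1 nb.2] else ne) []).isEmpty then 0
                 else pvMost1 ((pvNeighbors4 y x).foldl (fun ne nb =>
                    if pvInside (gvH g) (gvW g) nb.1 nb.2 && (pvAt g nb.1 nb.2 != 0) then
                      ne ++ [pvAt g nb.1 nb.2] else ne) []))
            else z) z) (g.map (fun r => r)) := rfl

theorem neighA_eq (g : List (List Int)) (y x : Int) :
    (pvNeighbors4 y x).foldl (fun ne nb =>
      if pvInside (gvH g) (gvW g) nb.1 nb.2 && (pvAt g nb.1 nb.2 != 0) then
        ne ++ [pvAt g nb.1 nb.2] else ne) [] = gvNeigh g y x := by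
  rw [PySem.List.foldl_append_if (fun nb => pvInside (gvH g) (gvW g) nb.1 nb.2 && (pvAt g nb.1 nb.2 != 0))
    (fun nb => pvAt g nb.1 nb.2) (pvNeighbors4 y x) []]
  rw [List.nil_append]
  rfl

theorem smallA_iff (g : List (List Int)) (thresh : Int) (p : Int × Int) (hp : gvValid g p) :
    ((smallAList g thresh).contains (pvAt (compsA g).1 p.1 p.2) = true) ↔ gvSmall g thresh p := by
  obtain ⟨⟨K1, K2, K3, K4, K5, K6, K7, K9⟩, hall⟩ := comps_final g
  rw [List.contains_iff_mem, smallAList, List.mem_map]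
  constructor
  · rintro ⟨it, hit, hlid⟩
    rw [List.mem_filter] at hit
    obtain ⟨hmem, hle⟩ := hit
    have hget := PySem.Dict.get?_of_mem_items _ (by rw [show (it.1, it.2) = it from rfl]; exact hmem) K7
    have hbounds := K6 _ _ hget
    have hlne : pvAt (compsA g).1 p.1 p.2 ≠ 0 := by rw [← hlid]; omega
    have hnz := (K3 p hp hlne).1
    obtain ⟨cv, iv, hent⟩ := K5 p hp hlne
    rw [← hlid] at hent
    rw [hent] at hget
    have : it.2 = (cv, (gvSize g p : Int), iv) := by injection hget with h; rw [h]
    refine ⟨hp, hnz, ?_⟩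
    rw [this] at hle
    simpa using hle
  · rintro ⟨hv, hnz, hsz⟩
    have hlne := hall p hp hnz
    obtain ⟨cv, iv, hent⟩ := K5 p hp hlne
    refine ⟨(pvAt (compsA g).1 p.1 p.2, (cv, (gvSize g p : Int), iv)), ?_, rfl⟩
    rw [List.mem_filter]
    constructor
    · have hcont : ((compsA g).2.2).contains (pvAt (compsA g).1 p.1 p.2) = true := by
        by_contra hcon
        have : ((compsA g).2.2).contains (pvAt (compsA g).1 p.1 p.2) = false := by
          cases h : ((compsA g).2.2).contains (pvAt (compsA g).1 p.1 p.2)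
          · rfl
          · exact absurd h hcon
        rw [← PySem.Dict.get?_eq_none_iff_contains] at this
        rw [hent] at this
        cases this
      rw [PySem.Dict.items_eq_map_keys _ K7 (cv, (gvSize g p : Int), iv), List.mem_map]
      refine ⟨pvAt (compsA g).1 p.1 p.2, (PySem.Dict.contains_iff_mem_keys _ _).mp hcont, ?_⟩
      have : ((compsA g).2.2).getD (pvAt (compsA g).1 p.1 p.2) (cv, (gvSize g p : Int), iv) =
          (cv, (gvSize g p : Int), iv) := by
        show (((compsA g).2.2).get? (pvAt (compsA g).1 p.1 p.2)).getD _ = _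
        rw [hent]
        rfl
      rw [this]
    · simpa using hsz

theorem smallA_empty_iff (g : List (List Int)) (thresh : Int) :
    ((smallAList g thresh).isEmpty = true) ↔ ∀ p : Int × Int, ¬ gvSmall g thresh p := by
  rw [List.isEmpty_iff]
  constructor
  · intro hnil p hsmall
    have := (smallA_iff g thresh p hsmall.1).mpr hsmall
    rw [List.contains_iff_mem, hnil] at this
    exact absurd this (List.not_mem_nil)
  · intro hnone
    obtain ⟨⟨K1, K2, K3, K4, K5, K6, K7, K9⟩, hall⟩ := comps_final g
    by_contra hne
    obtain ⟨r, hr⟩ := List.exists_mem_of_ne_nil _ hne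
    rw [smallAList, List.mem_map] at hr
    obtain ⟨it, hit, hr'⟩ := hr
    rw [List.mem_filter] at hit
    obtain ⟨hmem, hle⟩ := hit
    have hget := PySem.Dict.get?_of_mem_items _ (by rw [show (it.1, it.2) = it from rfl]; exact hmem) K7
    obtain ⟨p, hvp, hlp, hszp⟩ := K9 _ _ hget
    have hbounds := K6 _ _ hget
    have hlne : pvAt (compsA g).1 p.1 p.2 ≠ 0 := by rw [hlp]; omega
    have hnz := (K3 p hvp hlne).1
    apply hnone p
    refine ⟨hvp, hnz, ?_⟩
    rw [hszp] at hle
    simpa using hle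

theorem A_gridSpec (g : List (List Int)) (thresh : Int)
    (hpre : Pre_TR3_denoise_small_islands g thresh) :
    gridSpec g thresh (TR3_denoise_small_islands g thresh) := by
  have hrows := pre_rowsOk g thresh hpre
  rw [A_eq]
  by_cases hemp : (smallAList g thresh).isEmpty
  · rw [if_pos hemp, List.map_id']
    have hnone := (smallA_empty_iff g thresh).mp hemp
    exact ⟨rfl, fun y => rfl, fun y x => ⟨fun hs => absurd hs (hnone _), fun _ => rfl⟩⟩
  · rw [if_neg hemp, List.map_id']
    rw [foldl_nested_eq g (fun z y x =>
      if (smallAList g thresh).contains (pvAt (compsA g).1 y x) then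
        pvSet2 z y x
          (if ((pvNeighbors4 y x).foldl (fun ne nb =>
              if pvInside (gvH g) (gvW g) nb.1 nb.2 && (pvAt g nb.1 nb.2 != 0) then
                ne ++ [pvAt g nb.1 nb.2] else ne) []).isEmpty then 0
           else pvMost1 ((pvNeighbors4 y x).foldl (fun ne nb =>
              if pvInside (gvH g) (gvW g) nb.1 nb.2 && (pvAt g nb.1 nb.2 != 0) then
                ne ++ [pvAt g nb.1 nb.2] else ne) []))
      else z)]
    obtain ⟨hL, hR, hE⟩ := gvPass_spec g hrows
      (fun c => (smallAList g thresh).contains (pvAt (compsA g).1 c.1 c.2))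
      (fun c => if ((pvNeighbors4 c.1 c.2).foldl (fun ne nb =>
              if pvInside (gvH g) (gvW g) nb.1 nb.2 && (pvAt g nb.1 nb.2 != 0) then
                ne ++ [pvAt g nb.1 nb.2] else ne) []).isEmpty then 0
           else pvMost1 ((pvNeighbors4 c.1 c.2).foldl (fun ne nb =>
              if pvInside (gvH g) (gvW g) nb.1 nb.2 && (pvAt g nb.1 nb.2 != 0) then
                ne ++ [pvAt g nb.1 nb.2] else ne) []))
      (gvRaster g) g (fun c hc => (mem_gvRaster g c).mp hc) rfl (fun y => rfl)
    refine ⟨hL, hR, fun y x => ⟨?_, ?_⟩⟩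
    · intro hs
      rw [hE y x, if_pos ⟨(mem_gvRaster _ _).mpr hs.1,
        (smallA_iff g thresh ((y : Int), (x : Int)) hs.1).mpr hs⟩]
      rw [neighA_eq g (y : Int) (x : Int)]
      rfl
    · intro hns
      rw [hE y x, if_neg ?_]
      rintro ⟨hmem, hcond⟩
      exact hns ((smallA_iff g thresh ((y : Int), (x : Int)) ((mem_gvRaster _ _).mp hmem)).mp hcond)

-- ===== VERDICT (by name: the statement is the Claim_ definition above) =====
theorem TR3_denoise_small_islands_spec : Claim_equal_TR3_denoise_small_islands := by
  intro g thresh _ hpre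
  unfold Spec_TR3_denoise_small_islands
  exact gridSpec_unique g thresh _ _ (A_gridSpec g thresh hpre) (B_gridSpec g thresh hpre)
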